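-- pv_equiv track=rewrite | github.com/jjoshua2/arc_agi | dupes/d2abd087_group-014/test_correct/1221.py | transform
-- ===== SOURCE A (Python) =====
-- def transform(grid_lst: list[list[int]]) -> list[list[int]]:
--     if not grid_lst or not grid_lst[0]:
--         return []
--     rows = len(grid_lst)
--     cols = len(grid_lst[0])
--     output = [row[:] for row in grid_lst]
--     visited = [[False] * cols for _ in range(rows)]
--     directions = [(0, 1), (1, 0), (0, -1), (-1, 0)]
--     for i in range(rows):
--         for j in range(cols):
--             if grid_lst[i][j] == 5 and not visited[i][j]:
--                 component = []
--                 stack = [(i, j)]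
--                 visited[i][j] = True
--                 while stack:
--                     x, y = stack.pop()
--                     component.append((x, y))
--                     for dx, dy in directions:
--                         nx, ny = x + dx, y + dy
--                         if 0 <= nx < rows and 0 <= ny < cols and not visited[nx][ny] and grid_lst[nx][ny] == 5:
--                             visited[nx][ny] = True
--                             stack.append((nx, ny))
--                 size = len(component)
--                 color = 2 if size == 6 else 1
--                 for x, y in component:
--                     output[x][y] = color
--     return output
-- ===== SOURCE B (Python) =====
-- def transform(grid_lst: list[list[int]]) -> list[list[int]]:
--     if not grid_lst or not grid_lst[0]:
--         return []
--     rows, cols = len(grid_lst), len(grid_lst[0])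
--
--     # union-find over flattened cell indices; representative = smallest index in the class
--     parent = list(range(rows * cols))
--
--     def find(a):
--         while parent[a] != a:
--             a = parent[a]
--         return a
--
--     def union(a, b):
--         ra, rb = find(a), find(b)
--         if ra < rb:
--             parent[rb] = ra
--         elif rb < ra:
--             parent[ra] = rb
--
--     for i in range(rows):
--         for j in range(cols):
--             if grid_lst[i][j] == 5:
--                 if i + 1 < rows and grid_lst[i + 1][j] == 5:
--                     union(i * cols + j, (i + 1) * cols + j)
--                 if j + 1 < cols and grid_lst[i][j + 1] == 5:
--                     union(i * cols + j, i * cols + j + 1)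
--
--     size = [0] * (rows * cols)
--     for i in range(rows):
--         for j in range(cols):
--             if grid_lst[i][j] == 5:
--                 size[find(i * cols + j)] += 1
--
--     output = [row[:] for row in grid_lst]
--     for i in range(rows):
--         for j in range(cols):
--             if grid_lst[i][j] == 5:
--                 output[i][j] = 2 if size[find(i * cols + j)] == 6 else 1
--     return output
-- ===== Notes on version B (the rewrite author's own statement) =====
-- stated objective: alternative
-- what changed: Replaces the stack-based DFS flood fill with visited matrix by a union-find (disjoint-set, min-index representative) over flattened cell indices: union each 5-cell with its right/down 5-neighbour, tally component sizes per root, then recolor by the root's size.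
import Mathlib
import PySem

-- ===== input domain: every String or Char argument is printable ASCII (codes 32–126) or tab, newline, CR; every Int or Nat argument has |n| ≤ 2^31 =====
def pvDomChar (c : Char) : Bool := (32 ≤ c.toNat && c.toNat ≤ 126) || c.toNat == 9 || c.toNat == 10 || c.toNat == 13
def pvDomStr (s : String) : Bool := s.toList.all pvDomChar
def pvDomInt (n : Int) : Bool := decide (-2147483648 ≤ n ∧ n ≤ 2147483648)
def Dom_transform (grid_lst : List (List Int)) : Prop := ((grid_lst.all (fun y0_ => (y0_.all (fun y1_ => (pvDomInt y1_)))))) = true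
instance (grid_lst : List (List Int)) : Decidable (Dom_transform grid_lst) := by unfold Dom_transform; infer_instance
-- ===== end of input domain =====

-- B replaces A's DFS flood fill by union-find; equivalence is about the return value (A mutates only its own local copies).

-- ===== PORT A =====
-- grid_lst[i][j] (in-range under Pre_)
def cellA (g : List (List Int)) (i j : Nat) : Int := (g.getD i []).getD j 0

def vgetA (v : List (List Bool)) (i j : Nat) : Bool := (v.getD i []).getD j false
def vsetA (v : List (List Bool)) (i j : Nat) : List (List Bool) := v.set i ((v.getD i []).set j true)
def osetA (o : List (List Int)) (i j : Nat) (c : Int) : List (List Int) := o.set i ((o.getD i []).set j c)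

def dirsA : List (Int × Int) := [(0, 1), (1, 0), (0, -1), (-1, 0)]

-- one neighbour check of the DFS inner `for dx, dy in directions`
def pushA (g : List (List Int)) (rows cols : Nat) (x y : Nat)
    (sv : List (Nat × Nat) × List (List Bool)) (d : Int × Int) : List (Nat × Nat) × List (List Bool) :=
  let nx : Int := (x : Int) + d.1
  let ny : Int := (y : Int) + d.2
  if 0 ≤ nx ∧ nx < (rows : Int) ∧ 0 ≤ ny ∧ ny < (cols : Int) ∧
      vgetA sv.2 nx.toNat ny.toNat = false ∧ cellA g nx.toNat ny.toNat = 5 then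
    ((nx.toNat, ny.toNat) :: sv.1, vsetA sv.2 nx.toNat ny.toNat)
  else sv

-- the `while stack:` loop; fuel is an upper bound on (#unvisited cells + stack length), proved sufficient below
def dfsA (g : List (List Int)) (rows cols : Nat) :
    Nat → List (Nat × Nat) → List (List Bool) → List (Nat × Nat) → List (Nat × Nat) × List (List Bool)
  | 0, _, visited, acc => (acc, visited)
  | _ + 1, [], visited, acc => (acc, visited)
  | fuel + 1, (x, y) :: stack, visited, acc =>
      let sv := dirsA.foldl (pushA g rows cols x y) (stack, visited)
      dfsA g rows cols fuel sv.1 sv.2 (acc ++ [(x, y)])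

-- body of the double `for i … for j …` loop
def stepA (g : List (List Int)) (rows cols : Nat)
    (st : List (List Int) × List (List Bool)) (p : Nat × Nat) : List (List Int) × List (List Bool) :=
  if cellA g p.1 p.2 = 5 ∧ vgetA st.2 p.1 p.2 = false then
    let r := dfsA g rows cols (rows * cols + 1) [p] (vsetA st.2 p.1 p.2) []
    let color : Int := if r.1.length = 6 then 2 else 1
    (r.1.foldl (fun o q => osetA o q.1 q.2 color) st.1, r.2)
  else st

def cellsA (rows cols : Nat) : List (Nat × Nat) :=
  (List.range rows).flatMap (fun i => (List.range cols).map (fun j => (i, j)))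

def transform (grid_lst : List (List Int)) : List (List Int) :=
  if grid_lst.isEmpty || (grid_lst.headD []).isEmpty then [] else
    let rows := grid_lst.length
    let cols := (grid_lst.headD []).length
    ((cellsA rows cols).foldl (stepA grid_lst rows cols)
      (grid_lst, List.replicate rows (List.replicate cols false))).1

-- ===== PORT B =====
def cellB (g : List (List Int)) (i j : Nat) : Int := (g.getD i []).getD j 0

-- `while parent[a] != a: a = parent[a]`; fuel a+1 suffices since parents strictly decrease (min-index representative)
def findB (parent : List Nat) : Nat → Nat → Nat
  | 0, a => a
  | fuel + 1, a =>
      let p := parent.getD a a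
      if p = a then a else findB parent fuel p

def rootB (parent : List Nat) (a : Nat) : Nat := findB parent (a + 1) a

def unionB (parent : List Nat) (a b : Nat) : List Nat :=
  let ra := rootB parent a
  let rb := rootB parent b
  if ra < rb then parent.set rb ra
  else if rb < ra then parent.set ra rb
  else parent

-- body of the union double loop: union a 5-cell with its down and right 5-neighbours
def unionStepB (g : List (List Int)) (rows cols : Nat) (parent : List Nat) (p : Nat × Nat) : List Nat :=
  if cellB g p.1 p.2 = 5 then
    let par1 := if p.1 + 1 < rows ∧ cellB g (p.1 + 1) p.2 = 5 then
        unionB parent (p.1 * cols + p.2) ((p.1 + 1) * cols + p.2) else parent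
    if p.2 + 1 < cols ∧ cellB g p.1 (p.2 + 1) = 5 then
      unionB par1 (p.1 * cols + p.2) (p.1 * cols + p.2 + 1) else par1
  else parent

def cellsB (rows cols : Nat) : List (Nat × Nat) :=
  (List.range rows).flatMap (fun i => (List.range cols).map (fun j => (i, j)))

def osetB (o : List (List Int)) (i j : Nat) (c : Int) : List (List Int) := o.set i ((o.getD i []).set j c)

def transform_alt (grid_lst : List (List Int)) : List (List Int) :=
  if grid_lst.isEmpty || (grid_lst.headD []).isEmpty then [] else
    let rows := grid_lst.length
    let cols := (grid_lst.headD []).length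
    let parent := (cellsB rows cols).foldl (unionStepB grid_lst rows cols) (List.range (rows * cols))
    let size := (cellsB rows cols).foldl (fun s (p : Nat × Nat) =>
        if cellB grid_lst p.1 p.2 = 5 then
          let r := rootB parent (p.1 * cols + p.2)
          s.set r (s.getD r 0 + 1)
        else s) (List.replicate (rows * cols) (0 : Nat))
    (cellsB rows cols).foldl (fun o (p : Nat × Nat) =>
        if cellB grid_lst p.1 p.2 = 5 then
          osetB o p.1 p.2 (if size.getD (rootB parent (p.1 * cols + p.2)) 0 = 6 then 2 else 1)
        else o) grid_lst

-- ===== PRECONDITION & SPEC =====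
-- Pre_ excludes exactly the inputs where A raises IndexError: a row shorter than the first row
-- (unless the first row is empty, in which case A returns [] without indexing).
def Pre_transform (grid_lst : List (List Int)) : Prop :=
  (grid_lst.headD []) = [] ∨ ∀ row ∈ grid_lst, (grid_lst.headD []).length ≤ row.length
instance (grid_lst : List (List Int)) : Decidable (Pre_transform grid_lst) := by
  unfold Pre_transform; infer_instance

def pvWitness_transform : List (List Int) := [[5, 0, 5], [5, 5, 0], [0, 5, 3]]

def Spec_transform (grid_lst : List (List Int)) (out : List (List Int)) : Prop := out = transform_alt grid_lst
instance (grid_lst : List (List Int)) (out : List (List Int)) : Decidable (Spec_transform grid_lst out) := by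
  unfold Spec_transform; infer_instance

-- ===== CLAIM (what is proved, stated in full; the proofs are below) =====
def Claim_equal_transform : Prop := ∀ (grid_lst : List (List Int)), Dom_transform grid_lst → Pre_transform grid_lst → Spec_transform grid_lst (transform grid_lst)


-- ===== LEMMAS AND PROOFS =====

-- ---- spec-side graph of 5-cells ----
def ColsS (g : List (List Int)) : Nat := (g.headD []).length

def FiveS (g : List (List Int)) (p : Nat × Nat) : Prop :=
  p.1 < g.length ∧ p.2 < ColsS g ∧ cellA g p.1 p.2 = 5

def AdjS (g : List (List Int)) (p q : Nat × Nat) : Prop :=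
  FiveS g p ∧ FiveS g q ∧
    ((p.1 = q.1 ∧ (p.2 + 1 = q.2 ∨ q.2 + 1 = p.2)) ∨
     (p.2 = q.2 ∧ (p.1 + 1 = q.1 ∨ q.1 + 1 = p.1)))

def ConnS (g : List (List Int)) (p q : Nat × Nat) : Prop :=
  Relation.ReflTransGen (AdjS g) p q

noncomputable def CompCnt (g : List (List Int)) (p : Nat × Nat) : Nat :=
  (cellsA g.length (ColsS g)).countP (fun q => @decide (ConnS g p q) (Classical.propDecidable _))

noncomputable def SpecVal (g : List (List Int)) (i j : Nat) (v : Int) : Int :=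
  if j < ColsS g ∧ v = 5 then (if CompCnt g (i, j) = 6 then 2 else 1) else v

def Describes (g o : List (List Int)) : Prop :=
  o.length = g.length ∧
  ∀ i, (o.getD i []).length = (g.getD i []).length ∧
    ∀ j, (o.getD i []).getD j 0 = SpecVal g i j ((g.getD i []).getD j 0)

lemma adjS_symm {g : List (List Int)} {p q : Nat × Nat} (h : AdjS g p q) : AdjS g q p := by
  obtain ⟨h1, h2, h3⟩ := h
  exact ⟨h2, h1, by tauto⟩

lemma connS_symm {g : List (List Int)} {p q : Nat × Nat} (h : ConnS g p q) : ConnS g q p := by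
  induction h with
  | refl => exact Relation.ReflTransGen.refl
  | tail _ hbc ih => exact Relation.ReflTransGen.trans (Relation.ReflTransGen.single (adjS_symm hbc)) ih

lemma connS_five {g : List (List Int)} {p q : Nat × Nat} (h : ConnS g p q) (hp : FiveS g p) :
    FiveS g q := by
  induction h with
  | refl => exact hp
  | tail _ hbc _ => exact hbc.2.1

lemma compCnt_eq_of_conn {g : List (List Int)} {p q : Nat × Nat} (h : ConnS g p q) :
    CompCnt g p = CompCnt g q := by
  unfold CompCnt
  apply List.countP_congr
  intro x _
  simp only [decide_eq_true_eq]
  constructor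
  · exact fun hx => Relation.ReflTransGen.trans (connS_symm h) hx
  · exact fun hx => Relation.ReflTransGen.trans h hx

lemma mem_cellsA {rows cols : Nat} {p : Nat × Nat} :
    p ∈ cellsA rows cols ↔ p.1 < rows ∧ p.2 < cols := by
  obtain ⟨i, j⟩ := p
  simp [cellsA, List.mem_flatMap]

lemma nodup_cellsA {rows cols : Nat} : (cellsA rows cols).Nodup := by
  unfold cellsA
  rw [List.nodup_flatMap]
  constructor
  · intro i _
    exact List.nodup_range.map (fun a b h => by simpa using congrArg Prod.snd h)
  · apply List.Pairwise.imp_of_mem (l := List.range rows) (R := fun a b => a ≠ b)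
    · intro i j _ _ hne
      intro x hx hx'
      simp only [List.mem_map, List.mem_range] at hx hx'
      obtain ⟨a, _, ha⟩ := hx
      obtain ⟨b, _, hb⟩ := hx'
      exact hne (by rw [← ha] at hb; simpa using (congrArg Prod.fst hb).symm)
    · exact List.nodup_range

lemma length_cellsA {rows cols : Nat} : (cellsA rows cols).length = rows * cols := by
  unfold cellsA
  rw [List.length_flatMap]
  simp


-- ---- generic 2D matrix get/set lemmas (vgetA/vsetA/osetA/osetB are instances) ----
lemma getD_set_self {α : Type} (l : List α) (i : Nat) (a d : α) (h : i < l.length) :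
    (l.set i a).getD i d = a := by
  rw [List.getD_eq_getElem _ _ (by simpa using h)]
  simp

lemma getD_set_ne {α : Type} (l : List α) {i i' : Nat} (a d : α) (h : i ≠ i') :
    (l.set i a).getD i' d = l.getD i' d := by
  simp [List.getD, h]

lemma length_getD_set {α : Type} (l : List (List α)) (i i' : Nat) (r : List α)
    (hr : r.length = (l.getD i []).length) :
    ((l.set i r).getD i' []).length = (l.getD i' []).length := by
  by_cases h : i = i'
  · subst h
    by_cases hi : i < l.length
    · rw [getD_set_self _ _ _ _ hi, hr]
    · rw [List.set_eq_of_length_le (by omega)]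
  · rw [getD_set_ne _ _ _ h]

lemma vgetA_vsetA_self {v : List (List Bool)} {i j : Nat}
    (hi : i < v.length) (hj : j < (v.getD i []).length) :
    vgetA (vsetA v i j) i j = true := by
  unfold vgetA vsetA
  rw [getD_set_self _ _ _ _ hi, getD_set_self _ _ _ _ hj]

lemma vgetA_vsetA_ne {v : List (List Bool)} {i j i' j' : Nat}
    (h : (i', j') ≠ (i, j)) :
    vgetA (vsetA v i j) i' j' = vgetA v i' j' := by
  unfold vgetA vsetA
  by_cases hii : i = i'
  · subst hii
    have hjj : j ≠ j' := by intro hc; exact h (by simp [hc])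
    by_cases hi : i < v.length
    · rw [getD_set_self _ _ _ _ hi, getD_set_ne _ _ _ hjj]
    · rw [List.set_eq_of_length_le (by omega)]
  · rw [getD_set_ne _ _ _ hii]

lemma length_vsetA {v : List (List Bool)} {i j : Nat} : (vsetA v i j).length = v.length := by
  simp [vsetA]

lemma rowlen_vsetA {v : List (List Bool)} {i j i' : Nat} :
    ((vsetA v i j).getD i' []).length = (v.getD i' []).length := by
  unfold vsetA
  exact length_getD_set _ _ _ _ (by simp)

lemma length_osetA {o : List (List Int)} {i j : Nat} {c : Int} :
    (osetA o i j c).length = o.length := by simp [osetA]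

lemma rowlen_osetA {o : List (List Int)} {i j i' : Nat} {c : Int} :
    ((osetA o i j c).getD i' []).length = (o.getD i' []).length := by
  unfold osetA
  exact length_getD_set _ _ _ _ (by simp)

lemma oget_osetA_self {o : List (List Int)} {i j : Nat} {c : Int}
    (hi : i < o.length) (hj : j < (o.getD i []).length) :
    ((osetA o i j c).getD i []).getD j 0 = c := by
  unfold osetA
  rw [getD_set_self _ _ _ _ hi, getD_set_self _ _ _ _ hj]

lemma oget_osetA_ne {o : List (List Int)} {i j i' j' : Nat} {c : Int}
    (h : (i', j') ≠ (i, j)) :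
    ((osetA o i j c).getD i' []).getD j' 0 = (o.getD i' []).getD j' 0 := by
  unfold osetA
  by_cases hii : i = i'
  · subst hii
    have hjj : j ≠ j' := by intro hc; exact h (by simp [hc])
    by_cases hi : i < o.length
    · rw [getD_set_self _ _ _ _ hi, getD_set_ne _ _ _ hjj]
    · rw [List.set_eq_of_length_le (by omega)]
  · rw [getD_set_ne _ _ _ hii]

-- ---- counting: flipping one element of a nodup list from true to false ----
lemma countP_flip {α : Type} {l : List α} (hnd : l.Nodup) {p₀ : α} (hp : p₀ ∈ l)
    {f f' : α → Bool} (h0 : f p₀ = true) (h0' : f' p₀ = false)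
    (hrest : ∀ x ∈ l, x ≠ p₀ → f' x = f x) :
    l.countP f' + 1 = l.countP f := by
  induction l with
  | nil => cases hp
  | cons a t ih =>
    rcases List.mem_cons.1 hp with rfl | hpt
    · have hnt : p₀ ∉ t := (List.nodup_cons.1 hnd).1
      have : t.countP f' = t.countP f := by
        apply List.countP_congr
        intro x hx
        rw [hrest x (List.mem_cons_of_mem _ hx) (fun hc => hnt (hc ▸ hx))]
      simp [h0, h0', this]
    · have hap : a ≠ p₀ := fun hc => (List.nodup_cons.1 hnd).1 (hc ▸ hpt)
      have ha : f' a = f a := hrest a List.mem_cons_self hap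
      have := ih (List.nodup_cons.1 hnd).2 hpt
        (fun x hx hxp => hrest x (List.mem_cons_of_mem _ hx) hxp)
      simp only [List.countP_cons, ha]
      omega


-- ---- neighbour targets of one DFS pop ----
def tgtD (g : List (List Int)) (x y : Nat) (d : Int × Int) : Option (Nat × Nat) :=
  if 0 ≤ (x : Int) + d.1 ∧ (x : Int) + d.1 < (g.length : Int) ∧ 0 ≤ (y : Int) + d.2 ∧
      (y : Int) + d.2 < ((ColsS g : Nat) : Int) ∧
      cellA g ((x : Int) + d.1).toNat ((y : Int) + d.2).toNat = 5 then
    some (((x : Int) + d.1).toNat, ((y : Int) + d.2).toNat)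
  else none

lemma tgtD_right {g : List (List Int)} {x y : Nat} (hx : x < g.length) :
    tgtD g x y (0, 1) = if y + 1 < ColsS g ∧ cellA g x (y + 1) = 5 then some (x, y + 1) else none := by
  unfold tgtD
  have h1 : ((x : Int) + 0).toNat = x := by omega
  have h2 : ((y : Int) + 1).toNat = y + 1 := by omega
  simp only [h1, h2]
  by_cases hc : y + 1 < ColsS g ∧ cellA g x (y + 1) = 5
  · rw [if_pos ⟨by omega, by omega, by omega, by omega, hc.2⟩, if_pos hc]
  · rw [if_neg (fun h => hc ⟨by omega, h.2.2.2.2⟩), if_neg hc]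

lemma tgtD_down {g : List (List Int)} {x y : Nat} (hy : y < ColsS g) :
    tgtD g x y (1, 0) = if x + 1 < g.length ∧ cellA g (x + 1) y = 5 then some (x + 1, y) else none := by
  unfold tgtD
  have h1 : ((x : Int) + 1).toNat = x + 1 := by omega
  have h2 : ((y : Int) + 0).toNat = y := by omega
  simp only [h1, h2]
  by_cases hc : x + 1 < g.length ∧ cellA g (x + 1) y = 5
  · rw [if_pos ⟨by omega, by omega, by omega, by omega, hc.2⟩, if_pos hc]
  · rw [if_neg (fun h => hc ⟨by omega, h.2.2.2.2⟩), if_neg hc]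

lemma tgtD_left {g : List (List Int)} {x y : Nat} (hx : x < g.length) (hy : y < ColsS g) :
    tgtD g x y (0, -1) = if 1 ≤ y ∧ cellA g x (y - 1) = 5 then some (x, y - 1) else none := by
  unfold tgtD
  have h1 : ((x : Int) + 0).toNat = x := by omega
  have h2 : ((y : Int) + -1).toNat = y - 1 := by omega
  simp only [h1, h2]
  by_cases hc : 1 ≤ y ∧ cellA g x (y - 1) = 5
  · rw [if_pos ⟨by omega, by omega, by omega, by omega, hc.2⟩, if_pos hc]
  · rw [if_neg (fun h => hc ⟨by omega, h.2.2.2.2⟩), if_neg hc]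

lemma tgtD_up {g : List (List Int)} {x y : Nat} (hx : x < g.length) (hy : y < ColsS g) :
    tgtD g x y (-1, 0) = if 1 ≤ x ∧ cellA g (x - 1) y = 5 then some (x - 1, y) else none := by
  unfold tgtD
  have h1 : ((x : Int) + -1).toNat = x - 1 := by omega
  have h2 : ((y : Int) + 0).toNat = y := by omega
  simp only [h1, h2]
  by_cases hc : 1 ≤ x ∧ cellA g (x - 1) y = 5
  · rw [if_pos ⟨by omega, by omega, by omega, by omega, hc.2⟩, if_pos hc]
  · rw [if_neg (fun h => hc ⟨by omega, h.2.2.2.2⟩), if_neg hc]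

lemma tgtD_range {g : List (List Int)} {x y : Nat} {d : Int × Int} {q : Nat × Nat}
    (h : tgtD g x y d = some q) : q.1 < g.length ∧ q.2 < ColsS g := by
  unfold tgtD at h
  split_ifs at h with hc
  cases h; constructor <;> simp <;> omega

lemma tgtD_five {g : List (List Int)} {x y : Nat} {d : Int × Int} {q : Nat × Nat}
    (h : tgtD g x y d = some q) : FiveS g q := by
  have hr := tgtD_range h
  unfold tgtD at h
  split_ifs at h with hc
  cases h; exact ⟨hr.1, hr.2, hc.2.2.2.2⟩

-- existence of a direction hitting q iff q is adjacent to (x,y)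
lemma tgtD_adj {g : List (List Int)} {x y : Nat} {q : Nat × Nat} (hf : FiveS g (x, y)) :
    (∃ d ∈ dirsA, tgtD g x y d = some q) ↔ AdjS g (x, y) q := by
  obtain ⟨hx, hy, h5⟩ := hf
  simp only at hx hy h5
  constructor
  · rintro ⟨d, hd, hq⟩
    have hfq := tgtD_five hq
    refine ⟨⟨hx, hy, h5⟩, hfq, ?_⟩
    simp only [dirsA, List.mem_cons, List.not_mem_nil, or_false] at hd
    rcases hd with rfl | rfl | rfl | rfl
    · rw [tgtD_right hx] at hq; split_ifs at hq; cases hq; left; exact ⟨rfl, Or.inl rfl⟩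
    · rw [tgtD_down hy] at hq; split_ifs at hq; cases hq; right; exact ⟨rfl, Or.inl rfl⟩
    · rw [tgtD_left hx hy] at hq
      split_ifs at hq with hc
      cases hq; left; exact ⟨rfl, Or.inr (by simp; omega)⟩
    · rw [tgtD_up hx hy] at hq
      split_ifs at hq with hc
      cases hq; right; exact ⟨rfl, Or.inr (by simp; omega)⟩
  · rintro ⟨_, hfq, hrel⟩
    obtain ⟨qa, qb⟩ := q
    obtain ⟨hq1, hq2, hq5⟩ := hfq
    simp only at hq1 hq2 hq5 hrel
    rcases hrel with ⟨he, hj | hj⟩ | ⟨he, hi | hi⟩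
    · refine ⟨(0, 1), by simp [dirsA], ?_⟩
      rw [tgtD_right hx]
      have e1 : qa = x := he.symm
      have e2 : qb = y + 1 := hj.symm
      subst e1; subst e2
      rw [if_pos ⟨hq2, hq5⟩]
    · refine ⟨(0, -1), by simp [dirsA], ?_⟩
      rw [tgtD_left hx hy]
      have e1 : qa = x := he.symm
      have e2 : qb = y - 1 := by omega
      subst e1; subst e2
      rw [if_pos ⟨by omega, hq5⟩]
    · refine ⟨(1, 0), by simp [dirsA], ?_⟩
      rw [tgtD_down hy]
      have e1 : qa = x + 1 := hi.symm
      have e2 : qb = y := he.symm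
      subst e1; subst e2
      rw [if_pos ⟨hq1, hq5⟩]
    · refine ⟨(-1, 0), by simp [dirsA], ?_⟩
      rw [tgtD_up hx hy]
      have e1 : qa = x - 1 := by omega
      have e2 : qb = y := he.symm
      subst e1; subst e2
      rw [if_pos ⟨by omega, hq5⟩]

lemma tgts_eq {g : List (List Int)} {x y : Nat} (hx : x < g.length) (hy : y < ColsS g) :
    dirsA.filterMap (tgtD g x y) =
      (if y + 1 < ColsS g ∧ cellA g x (y + 1) = 5 then [(x, y + 1)] else []) ++
      (if x + 1 < g.length ∧ cellA g (x + 1) y = 5 then [(x + 1, y)] else []) ++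
      (if 1 ≤ y ∧ cellA g x (y - 1) = 5 then [(x, y - 1)] else []) ++
      (if 1 ≤ x ∧ cellA g (x - 1) y = 5 then [(x - 1, y)] else []) := by
  simp only [dirsA, List.filterMap_cons, List.filterMap_nil,
    tgtD_right hx, tgtD_down hy, tgtD_left hx hy, tgtD_up hx hy]
  split_ifs <;> simp

lemma nodup_tgts {g : List (List Int)} {x y : Nat} (hx : x < g.length) (hy : y < ColsS g) :
    (dirsA.filterMap (tgtD g x y)).Nodup := by
  rw [tgts_eq hx hy]
  split_ifs <;>
    simp_all [List.nodup_cons, Prod.ext_iff] <;> omega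


-- ---- visited-matrix abstractions ----
def VDims (g : List (List Int)) (v : List (List Bool)) : Prop :=
  v.length = g.length ∧ ∀ i < g.length, (v.getD i []).length = ColsS g

def uncnt (g : List (List Int)) (v : List (List Bool)) : Nat :=
  (cellsA g.length (ColsS g)).countP (fun p => !vgetA v p.1 p.2)

lemma uncnt_flip {g : List (List Int)} {v : List (List Bool)} {q : Nat × Nat}
    (hd : VDims g v) (h1 : q.1 < g.length) (h2 : q.2 < ColsS g)
    (hun : vgetA v q.1 q.2 = false) :
    uncnt g (vsetA v q.1 q.2) + 1 = uncnt g v := by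
  apply countP_flip nodup_cellsA (mem_cellsA.2 ⟨h1, h2⟩)
  · simp [hun]
  · have : vgetA (vsetA v q.1 q.2) q.1 q.2 = true :=
      vgetA_vsetA_self (by rw [hd.1]; exact h1) (by rw [hd.2 q.1 h1]; exact h2)
    simp [this]
  · intro x _ hx
    rw [vgetA_vsetA_ne (by exact fun hc => hx (by cases x; cases q; simpa using hc))]

lemma VDims_vsetA {g : List (List Int)} {v : List (List Bool)} {i j : Nat} (hd : VDims g v) :
    VDims g (vsetA v i j) := by
  refine ⟨by rw [length_vsetA, hd.1], fun i' hi' => ?_⟩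
  rw [rowlen_vsetA]; exact hd.2 i' hi'

-- ---- the push phase of one DFS pop ----
lemma pushA_none {g : List (List Int)} {x y : Nat} {d : Int × Int}
    {sv : List (Nat × Nat) × List (List Bool)} (h : tgtD g x y d = none) :
    pushA g g.length (ColsS g) x y sv d = sv := by
  unfold tgtD at h
  split_ifs at h with hc
  simp only [pushA]
  rw [if_neg (fun hh => hc ⟨hh.1, hh.2.1, hh.2.2.1, hh.2.2.2.1, hh.2.2.2.2.2⟩)]

lemma pushA_some {g : List (List Int)} {x y : Nat} {d : Int × Int} {q : Nat × Nat}
    {sv : List (Nat × Nat) × List (List Bool)} (h : tgtD g x y d = some q) :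
    pushA g g.length (ColsS g) x y sv d =
      if vgetA sv.2 q.1 q.2 = false then (q :: sv.1, vsetA sv.2 q.1 q.2) else sv := by
  unfold tgtD at h
  split_ifs at h with hc
  cases h
  simp only [pushA]
  by_cases hv : vgetA sv.2 ((x : Int) + d.1).toNat ((y : Int) + d.2).toNat = false
  · rw [if_pos ⟨hc.1, hc.2.1, hc.2.2.1, hc.2.2.2.1, hv, hc.2.2.2.2⟩, if_pos hv]
  · rw [if_neg (fun hh => hv hh.2.2.2.2.1), if_neg hv]

lemma push_spine {g : List (List Int)} {x y : Nat} :
    ∀ (ds : List (Int × Int)) (stack : List (Nat × Nat)) (v : List (List Bool)),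
    VDims g v → (ds.filterMap (tgtD g x y)).Nodup →
    ∃ ns v',
      ds.foldl (pushA g g.length (ColsS g) x y) (stack, v) = (ns ++ stack, v') ∧
      ns.Nodup ∧
      (∀ q, q ∈ ns ↔ q ∈ ds.filterMap (tgtD g x y) ∧ vgetA v q.1 q.2 = false) ∧
      VDims g v' ∧
      (∀ p : Nat × Nat, vgetA v' p.1 p.2 = true ↔ (vgetA v p.1 p.2 = true ∨ p ∈ ns)) ∧
      uncnt g v' + ns.length = uncnt g v := by
  intro ds
  induction ds with
  | nil =>
    intro stack v hd _
    exact ⟨[], v, by simp, by simp, by simp, hd, by simp, by simp⟩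
  | cons d ds ih =>
    intro stack v hd hnd
    rcases htd : tgtD g x y d with _ | q
    · rw [List.filterMap_cons_none htd] at hnd
      obtain ⟨ns, v', he, h1, h2, h3, h4, h5⟩ := ih stack v hd hnd
      refine ⟨ns, v', ?_, h1, ?_, h3, h4, h5⟩
      · rw [List.foldl_cons, pushA_none htd]; exact he
      · intro q'; rw [h2 q', List.filterMap_cons_none htd]
    · rw [List.filterMap_cons_some htd] at hnd
      have hq1 := (tgtD_range htd).1
      have hq2 := (tgtD_range htd).2
      have hqnm : q ∉ ds.filterMap (tgtD g x y) := (List.nodup_cons.1 hnd).1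
      have hnd' : (ds.filterMap (tgtD g x y)).Nodup := (List.nodup_cons.1 hnd).2
      by_cases hv : vgetA v q.1 q.2 = false
      · -- fresh neighbour: pushed and marked
        have hstep : pushA g g.length (ColsS g) x y (stack, v) d
            = (q :: stack, vsetA v q.1 q.2) := by rw [pushA_some htd]; simp [hv]
        obtain ⟨ns, v', he, h1, h2, h3, h4, h5⟩ :=
          ih (q :: stack) (vsetA v q.1 q.2) (VDims_vsetA hd) hnd'
        have hqset : vgetA (vsetA v q.1 q.2) q.1 q.2 = true :=
          vgetA_vsetA_self (by rw [hd.1]; exact hq1) (by rw [hd.2 q.1 hq1]; exact hq2)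
        have hqns : q ∉ ns := fun hmem => by
          have := (h2 q).1 hmem
          rw [hqset] at this
          exact absurd this.2 (by simp)
        refine ⟨ns ++ [q], v', ?_, ?_, ?_, h3, ?_, ?_⟩
        · rw [List.foldl_cons, hstep, he]; simp
        · rw [List.nodup_append]
          refine ⟨h1, List.nodup_singleton q, ?_⟩
          intro a ha b hb
          rw [List.mem_singleton] at hb
          exact fun hc => hqns ((hc.trans hb) ▸ ha)
        · intro q'
          rw [List.filterMap_cons_some htd, List.mem_append, List.mem_cons]
          by_cases hq' : q' = q
          · subst hq'
            simp [hv]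
          · rw [h2 q', vgetA_vsetA_ne (by exact fun hc => hq' (by cases q'; cases q; simpa using hc))]
            simp [hq']
        · intro p
          rw [h4 p]
          by_cases hpq : p = q
          · subst hpq; rw [hqset]; simp
          · rw [vgetA_vsetA_ne (by exact fun hc => hpq (by cases p; cases q; simpa using hc))]
            simp only [List.mem_append, List.mem_singleton, hpq, or_false]
        · have hflip := uncnt_flip hd hq1 hq2 hv
          simp only [List.length_append, List.length_cons, List.length_nil]
          omega
      · -- already visited: skipped
        have hstep : pushA g g.length (ColsS g) x y (stack, v) d = (stack, v) := by
          rw [pushA_some htd]; simp [hv]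
        obtain ⟨ns, v', he, h1, h2, h3, h4, h5⟩ := ih stack v hd hnd'
        refine ⟨ns, v', ?_, h1, ?_, h3, h4, h5⟩
        · rw [List.foldl_cons, hstep]; exact he
        · intro q'
          rw [h2 q', List.filterMap_cons_some htd, List.mem_cons]
          constructor
          · rintro ⟨hm, hu⟩; exact ⟨Or.inr hm, hu⟩
          · rintro ⟨hm | hm, hu⟩
            · subst hm; exact absurd hu hv
            · exact ⟨hm, hu⟩


-- ---- DFS correctness ----
lemma dfsA_stop {g : List (List Int)} {fuel : Nat} {v : List (List Bool)} {a : List (Nat × Nat)} :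
    dfsA g g.length (ColsS g) fuel [] v a = (a, v) := by
  cases fuel <;> rfl

lemma notV_of_conn {g : List (List Int)} {V : Nat × Nat → Prop}
    (hVc : ∀ p q, V p → AdjS g p q → V q) {seed : Nat × Nat} (hsV : ¬ V seed)
    {q : Nat × Nat} (h : ConnS g seed q) : ¬ V q := by
  induction h with
  | refl => exact hsV
  | tail _ hbc ih => exact fun hc => ih (hVc _ _ hc (adjS_symm hbc))

lemma dfsA_base {g : List (List Int)} {V : Nat × Nat → Prop}
    (hVc : ∀ p q, V p → AdjS g p q → V q) {seed : Nat × Nat} (hsV : ¬ V seed)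
    {visited : List (List Bool)} {acc : List (Nat × Nat)}
    (hvis : ∀ p : Nat × Nat, vgetA visited p.1 p.2 = true ↔ (V p ∨ p ∈ acc))
    (hmem : ∀ p ∈ acc, FiveS g p ∧ ConnS g seed p)
    (hfr : ∀ p ∈ acc, ∀ q, AdjS g p q → vgetA visited q.1 q.2 = true)
    (hseed : seed ∈ acc) :
    ∀ q, q ∈ acc ↔ FiveS g q ∧ ConnS g seed q := by
  intro q
  constructor
  · exact fun hq => hmem q hq
  · rintro ⟨hf, hc⟩
    clear hf
    induction hc with
    | refl => exact hseed
    | tail hsb hbc ih3 =>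
      rename_i b c
      have hvq := hfr b ih3 c hbc
      rcases (hvis c).1 hvq with hV | hc'
      · exact absurd hV (notV_of_conn hVc hsV (Relation.ReflTransGen.tail hsb hbc))
      · exact hc'

lemma dfsA_master {g : List (List Int)} (V : Nat × Nat → Prop)
    (hVc : ∀ p q, V p → AdjS g p q → V q) (seed : Nat × Nat) (hsV : ¬ V seed) :
    ∀ (fuel : Nat) (stack : List (Nat × Nat)) (visited : List (List Bool)) (acc : List (Nat × Nat)),
    VDims g visited →
    (∀ p : Nat × Nat, vgetA visited p.1 p.2 = true ↔ (V p ∨ p ∈ stack ∨ p ∈ acc)) →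
    stack.Nodup → acc.Nodup → (∀ p ∈ stack, p ∉ acc) →
    (∀ p, (p ∈ stack ∨ p ∈ acc) → FiveS g p ∧ ConnS g seed p) →
    (∀ p ∈ acc, ∀ q, AdjS g p q → vgetA visited q.1 q.2 = true) →
    (seed ∈ stack ∨ seed ∈ acc) →
    uncnt g visited + stack.length ≤ fuel →
    ∃ accF vF, dfsA g g.length (ColsS g) fuel stack visited acc = (accF, vF) ∧
      accF.Nodup ∧ (∀ q, q ∈ accF ↔ FiveS g q ∧ ConnS g seed q) ∧
      VDims g vF ∧ (∀ p : Nat × Nat, vgetA vF p.1 p.2 = true ↔ (V p ∨ p ∈ accF)) := by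
  intro fuel
  induction fuel with
  | zero =>
    intro stack visited acc hdim hvis hnds hnda hdisj hmem hfr hseed hbound
    have hstack : stack = [] := by
      cases stack with
      | nil => rfl
      | cons a t => simp at hbound
    subst hstack
    have hvis2 : ∀ p : Nat × Nat, vgetA visited p.1 p.2 = true ↔ (V p ∨ p ∈ acc) :=
      fun p => by rw [hvis p]; simp
    exact ⟨acc, visited, by cases g <;> rfl, hnda,
      dfsA_base hVc hsV hvis2 (fun p hp => hmem p (Or.inr hp)) hfr
        (hseed.resolve_left (by simp)), hdim, hvis2⟩
  | succ fuel ih =>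
    intro stack visited acc hdim hvis hnds hnda hdisj hmem hfr hseed hbound
    cases stack with
    | nil =>
      have hvis2 : ∀ p : Nat × Nat, vgetA visited p.1 p.2 = true ↔ (V p ∨ p ∈ acc) :=
        fun p => by rw [hvis p]; simp
      exact ⟨acc, visited, dfsA_stop, hnda,
        dfsA_base hVc hsV hvis2 (fun p hp => hmem p (Or.inr hp)) hfr
          (hseed.resolve_left (by simp)), hdim, hvis2⟩
    | cons hd tl =>
      obtain ⟨x, y⟩ := hd
      have hfxy : FiveS g (x, y) ∧ ConnS g seed (x, y) := hmem (x, y) (Or.inl List.mem_cons_self)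
      have hx : x < g.length := hfxy.1.1
      have hy : y < ColsS g := hfxy.1.2.1
      obtain ⟨ns, v', he, hnsnd, hnsmem, hdim', hvis', hcnt⟩ :=
        push_spine dirsA tl visited hdim (nodup_tgts hx hy)
      have hrun : dfsA g g.length (ColsS g) (fuel + 1) ((x, y) :: tl) visited acc =
          dfsA g g.length (ColsS g) fuel (ns ++ tl) v' (acc ++ [(x, y)]) := by
        show dfsA g g.length (ColsS g) fuel
            (dirsA.foldl (pushA g g.length (ColsS g) x y) (tl, visited)).1
            (dirsA.foldl (pushA g g.length (ColsS g) x y) (tl, visited)).2 (acc ++ [(x, y)]) =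
          _
        rw [he]
      rw [hrun]
      -- facts about ns
      have hns_adj : ∀ q ∈ ns, AdjS g (x, y) q ∧ vgetA visited q.1 q.2 = false := by
        intro q hq
        obtain ⟨hm, hu⟩ := (hnsmem q).1 hq
        obtain ⟨d, hd, htg⟩ := List.mem_filterMap.1 hm
        exact ⟨(tgtD_adj hfxy.1).1 ⟨d, hd, htg⟩, hu⟩
      have hns_fresh : ∀ q ∈ ns, ¬ (V q ∨ q ∈ (x, y) :: tl ∨ q ∈ acc) := by
        intro q hq hc
        have := (hvis q).2 hc
        rw [(hns_adj q hq).2] at this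
        cases this
      -- apply the induction hypothesis
      apply ih (ns ++ tl) v' (acc ++ [(x, y)]) hdim'
      · intro p
        rw [hvis' p, hvis p]
        simp only [List.mem_append, List.mem_cons]
        tauto
      · rw [List.nodup_append]
        refine ⟨hnsnd, (List.nodup_cons.1 hnds).2, ?_⟩
        intro a ha b hb hab
        exact hns_fresh a ha (Or.inr (Or.inl (List.mem_cons_of_mem _ (hab ▸ hb))))
      · rw [List.nodup_append]
        refine ⟨hnda, List.nodup_singleton _, ?_⟩
        intro a ha b hb hab
        rw [List.mem_singleton] at hb
        exact hdisj (x, y) List.mem_cons_self ((hab.trans hb) ▸ ha)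
      · intro p hp hpacc
        rw [List.mem_append, List.mem_singleton] at hpacc
        rcases List.mem_append.1 hp with hp | hp
        · rcases hpacc with hpacc | hpacc
          · exact hns_fresh p hp (Or.inr (Or.inr hpacc))
          · exact hns_fresh p hp (Or.inr (Or.inl (hpacc ▸ List.mem_cons_self)))
        · rcases hpacc with hpacc | hpacc
          · exact hdisj p (List.mem_cons_of_mem _ hp) hpacc
          · exact (List.nodup_cons.1 hnds).1 (hpacc ▸ hp)
      · intro p hp
        rcases hp with hp | hp
        · rcases List.mem_append.1 hp with hp | hp
          · have hadj := (hns_adj p hp).1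
            exact ⟨hadj.2.1, Relation.ReflTransGen.tail hfxy.2 hadj⟩
          · exact hmem p (Or.inl (List.mem_cons_of_mem _ hp))
        · rcases List.mem_append.1 hp with hp | hp
          · exact hmem p (Or.inr hp)
          · rw [List.mem_singleton] at hp
            exact hp ▸ hfxy
      · intro p hp q hq
        rcases List.mem_append.1 hp with hp | hp
        · rw [hvis' q]
          left
          exact hfr p hp q hq
        · rw [List.mem_singleton] at hp
          subst hp
          rw [hvis' q]
          by_cases hu : vgetA visited q.1 q.2 = true
          · exact Or.inl hu
          · right
            apply (hnsmem q).2
            refine ⟨List.mem_filterMap.2 ?_, by simpa using hu⟩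
            obtain ⟨d, hd, htg⟩ := (tgtD_adj hfxy.1).2 hq
            exact ⟨d, hd, htg⟩
      · rcases hseed with hs | hs
        · rcases List.mem_cons.1 hs with hs | hs
          · right; rw [List.mem_append, List.mem_singleton]; exact Or.inr hs
          · left; rw [List.mem_append]; exact Or.inr hs
        · right; rw [List.mem_append]; exact Or.inl hs
      · rw [List.length_append]
        simp only [List.length_cons] at hbound
        omega


-- ---- recoloring a list of cells ----
lemma recolor_fold {g : List (List Int)} (color : Int) :
    ∀ (ns : List (Nat × Nat)) (o : List (List Int)),
    o.length = g.length → (∀ i, (o.getD i []).length = (g.getD i []).length) →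
    (∀ q ∈ ns, q.1 < g.length ∧ q.2 < (g.getD q.1 []).length) →
    (ns.foldl (fun o (q : Nat × Nat) => osetA o q.1 q.2 color) o).length = g.length ∧
    (∀ i, ((ns.foldl (fun o (q : Nat × Nat) => osetA o q.1 q.2 color) o).getD i []).length =
      (g.getD i []).length) ∧
    (∀ i j, ((ns.foldl (fun o (q : Nat × Nat) => osetA o q.1 q.2 color) o).getD i []).getD j 0 =
      if (i, j) ∈ ns then color else (o.getD i []).getD j 0) := by
  intro ns
  induction ns with
  | nil => intro o h1 h2 _; exact ⟨h1, h2, fun i j => by simp⟩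
  | cons q ns ih =>
    intro o h1 h2 hin
    have hq := hin q List.mem_cons_self
    have h1' : (osetA o q.1 q.2 color).length = g.length := by rw [length_osetA, h1]
    have h2' : ∀ i, ((osetA o q.1 q.2 color).getD i []).length = (g.getD i []).length := by
      intro i; rw [rowlen_osetA, h2]
    obtain ⟨g1, g2, g3⟩ := ih (osetA o q.1 q.2 color) h1' h2'
      (fun q' hq' => hin q' (List.mem_cons_of_mem _ hq'))
    refine ⟨g1, g2, fun i j => ?_⟩
    rw [List.foldl_cons] at *
    rw [g3 i j]
    by_cases hmem : (i, j) ∈ ns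
    · rw [if_pos hmem, if_pos (List.mem_cons_of_mem _ hmem)]
    · rw [if_neg hmem]
      by_cases hd : (i, j) = q
      · rw [if_pos (hd ▸ List.mem_cons_self)]
        cases hd
        exact oget_osetA_self (by rw [h1]; exact hq.1) (by rw [h2]; exact hq.2)
      · rw [if_neg (by simp [hmem, hd]), oget_osetA_ne hd]

-- component list length = component count
lemma acc_length {g : List (List Int)} {p : Nat × Nat} {accF : List (Nat × Nat)}
    (hf : FiveS g p) (hnd : accF.Nodup)
    (hmem : ∀ q, q ∈ accF ↔ FiveS g q ∧ ConnS g p q) :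
    accF.length = CompCnt g p := by
  unfold CompCnt
  rw [List.countP_eq_length_filter]
  have hperm : accF.Perm ((cellsA g.length (ColsS g)).filter
      (fun q => @decide (ConnS g p q) (Classical.propDecidable _))) := by
    rw [List.perm_ext_iff_of_nodup hnd (nodup_cellsA.filter _)]
    intro q
    rw [hmem q, List.mem_filter]
    constructor
    · rintro ⟨hfq, hcq⟩
      exact ⟨mem_cellsA.2 ⟨hfq.1, hfq.2.1⟩, by exact @decide_eq_true _ (Classical.propDecidable _) hcq⟩
    · rintro ⟨hq, hcq⟩
      have hcq' : ConnS g p q := @of_decide_eq_true _ (Classical.propDecidable _) hcq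
      exact ⟨connS_five hcq' hf, hcq'⟩
  exact hperm.length_eq

-- ---- the outer scan invariant (A side) ----
def OuterInv (g : List (List Int)) (W : Nat × Nat → Prop)
    (st : List (List Int) × List (List Bool)) : Prop :=
  VDims g st.2 ∧
  (∀ p : Nat × Nat, vgetA st.2 p.1 p.2 = true ↔ W p) ∧
  (∀ p, W p → FiveS g p) ∧
  (∀ p q, W p → AdjS g p q → W q) ∧
  st.1.length = g.length ∧
  (∀ i, (st.1.getD i []).length = (g.getD i []).length) ∧
  (∀ i j, (W (i, j) → (st.1.getD i []).getD j 0 = (if CompCnt g (i, j) = 6 then 2 else 1)) ∧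
    (¬ W (i, j) → (st.1.getD i []).getD j 0 = (g.getD i []).getD j 0))

lemma outer_fold {g : List (List Int)} (hpre : ∀ row ∈ g, ColsS g ≤ row.length) :
    ∀ (l : List (Nat × Nat)) (st : List (List Int) × List (List Bool)) (W : Nat × Nat → Prop),
    (∀ p ∈ l, p.1 < g.length ∧ p.2 < ColsS g) → OuterInv g W st →
    ∃ W', OuterInv g W' (l.foldl (stepA g g.length (ColsS g)) st) ∧
      (∀ p, W p → W' p) ∧ (∀ p ∈ l, FiveS g p → W' p) := by
  intro l
  induction l with
  | nil => intro st W _ hinv; exact ⟨W, hinv, fun _ h => h, by simp⟩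
  | cons p l ih =>
    intro st W hl hinv
    obtain ⟨hdim, hvis, hWf, hWc, ho1, ho2, ho3⟩ := hinv
    have hpr := hl p List.mem_cons_self
    rw [List.foldl_cons]
    by_cases hrun : cellA g p.1 p.2 = 5 ∧ vgetA st.2 p.1 p.2 = false
    · -- a fresh component is flooded
      have hfp : FiveS g p := ⟨hpr.1, hpr.2, hrun.1⟩
      have hWp : ¬ W p := fun hc => by
        have := (hvis p).2 hc
        rw [hrun.2] at this
        cases this
      have hself : vgetA (vsetA st.2 p.1 p.2) p.1 p.2 = true :=
        vgetA_vsetA_self (by rw [hdim.1]; exact hpr.1) (by rw [hdim.2 p.1 hpr.1]; exact hpr.2)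
      have hbound : uncnt g (vsetA st.2 p.1 p.2) + 1 ≤ g.length * ColsS g + 1 := by
        have h1 : uncnt g (vsetA st.2 p.1 p.2) + 1 = uncnt g st.2 :=
          uncnt_flip hdim hpr.1 hpr.2 hrun.2
        have h2 : uncnt g st.2 ≤ g.length * ColsS g := by
          have := List.countP_le_length
            (l := cellsA g.length (ColsS g)) (p := fun q : Nat × Nat => !vgetA st.2 q.1 q.2)
          rw [length_cellsA] at this
          exact this
        omega
      obtain ⟨accF, vF, hrunq, hndF, hmemF, hdimF, hvisF⟩ :=
        dfsA_master W hWc p hWp (g.length * ColsS g + 1) [p] (vsetA st.2 p.1 p.2) []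
          (VDims_vsetA hdim)
          (by
            intro q
            by_cases hqp : q = p
            · subst hqp; rw [hself]; simp
            · rw [vgetA_vsetA_ne (by exact fun hc => hqp (by cases q; cases p; simpa using hc))]
              rw [hvis q]
              simp [hqp])
          (List.nodup_singleton p) List.nodup_nil (by simp)
          (by
            rintro q (hq | hq)
            · rw [List.mem_singleton] at hq
              subst hq
              exact ⟨hfp, Relation.ReflTransGen.refl⟩
            · cases hq)
          (by intro q hq; cases hq)
          (Or.inl (List.mem_cons_self))
          (by simpa using hbound)
      -- unfold the step
      have hstep : stepA g g.length (ColsS g) st p =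
          (accF.foldl (fun o (q : Nat × Nat) => osetA o q.1 q.2
            (if accF.length = 6 then 2 else 1)) st.1, vF) := by
        unfold stepA
        rw [if_pos hrun, hrunq]
      rw [hstep]
      have hlen6 : accF.length = CompCnt g p := acc_length hfp hndF hmemF
      obtain ⟨r1, r2, r3⟩ := recolor_fold (if accF.length = 6 then 2 else 1) accF st.1 ho1 ho2
        (by
          intro q hq
          have hfq := ((hmemF q).1 hq).1
          exact ⟨hfq.1, lt_of_lt_of_le hfq.2.1 (hpre _ (by
            rw [List.getD_eq_getElem _ _ (by exact hfq.1)]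
            exact List.getElem_mem _))⟩)
      refine ih (accF.foldl (fun o (q : Nat × Nat) => osetA o q.1 q.2
            (if accF.length = 6 then 2 else 1)) st.1, vF)
          (fun q => W q ∨ (FiveS g q ∧ ConnS g p q))
          (fun q hq => hl q (List.mem_cons_of_mem _ hq)) ?_ |>.imp ?_
      · refine ⟨hdimF, ?_, ?_, ?_, r1, r2, ?_⟩
        · intro q
          rw [hvisF q, hmemF q]
        · rintro q (hq | hq)
          · exact hWf q hq
          · exact hq.1
        · rintro q q' (hq | hq) hadj
          · exact Or.inl (hWc q q' hq hadj)
          · exact Or.inr ⟨hadj.2.1, Relation.ReflTransGen.tail hq.2 hadj⟩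
        · intro i j
          constructor
          · intro hW'
            rw [r3 i j]
            by_cases hmem : (i, j) ∈ accF
            · rw [if_pos hmem, hlen6, compCnt_eq_of_conn ((hmemF _).1 hmem).2]
            · rw [if_neg hmem]
              have hW : W (i, j) := hW'.resolve_right (fun hc => hmem ((hmemF _).2 hc))
              exact (ho3 i j).1 hW
          · intro hW'
            rw [r3 i j, if_neg (fun hmem => hW' (Or.inr ((hmemF _).1 hmem)))]
            exact (ho3 i j).2 (fun hc => hW' (Or.inl hc))
      · rintro W' ⟨hinv', hmono, hrest⟩
        refine ⟨hinv', fun q hq => hmono q (Or.inl hq), ?_⟩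
        intro q hq hfq
        rcases List.mem_cons.1 hq with rfl | hq
        · exact hmono q (Or.inr ⟨hfq, Relation.ReflTransGen.refl⟩)
        · exact hrest q hq hfq
    · -- skipped cell
      have hstep : stepA g g.length (ColsS g) st p = st := by
        unfold stepA
        rw [if_neg hrun]
      rw [hstep]
      refine (ih st W (fun q hq => hl q (List.mem_cons_of_mem _ hq))
        ⟨hdim, hvis, hWf, hWc, ho1, ho2, ho3⟩).imp ?_
      rintro W' ⟨hinv', hmono, hrest⟩
      refine ⟨hinv', hmono, ?_⟩
      intro q hq hfq
      rcases List.mem_cons.1 hq with rfl | hq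
      · -- p is a 5-cell already visited, hence already in W
        have hvg : vgetA st.2 q.1 q.2 = true := by
          rcases Bool.eq_false_or_eq_true (vgetA st.2 q.1 q.2) with hvg | hvg
          · exact hvg
          · exact absurd ⟨hfq.2.2, hvg⟩ hrun
        exact hmono q ((hvis q).1 hvg)
      · exact hrest q hq hfq


-- ---- the full A port satisfies Describes ----
lemma transform_describes {g : List (List Int)}
    (hpre : ∀ row ∈ g, ColsS g ≤ row.length)
    (hne : g ≠ []) (hce : ColsS g ≠ 0) :
    Describes g (transform g) := by
  have hguard : (g.isEmpty || (g.headD []).isEmpty) = false := by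
    cases g with
    | nil => exact absurd rfl hne
    | cons r t =>
      simp only [List.isEmpty_cons, Bool.false_or, List.headD_cons]
      cases r with
      | nil => simp [ColsS] at hce
      | cons a s => rfl
  unfold transform
  rw [if_neg (by rw [hguard]; exact Bool.false_ne_true)]
  show Describes g (((cellsA g.length (ColsS g)).foldl (stepA g g.length (ColsS g))
    (g, List.replicate g.length (List.replicate (ColsS g) false))).1)
  have hinit : OuterInv g (fun _ => False)
      (g, List.replicate g.length (List.replicate (ColsS g) false)) := by
    refine ⟨⟨by simp, ?_⟩, ?_, by simp, by simp, rfl, fun _ => rfl, ?_⟩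
    · intro i hi
      rw [List.getD_replicate _ hi, List.length_replicate]
    · intro p
      simp only [iff_false]
      intro hc
      unfold vgetA at hc
      by_cases hi : p.1 < g.length
      · rw [List.getD_replicate _ hi] at hc
        by_cases hj : p.2 < ColsS g
        · rw [List.getD_replicate _ hj] at hc; cases hc
        · rw [List.getD_eq_default _ _ (by simpa using hj)] at hc; cases hc
      · rw [List.getD_eq_default (List.replicate g.length (List.replicate (ColsS g) false)) []
          (by rw [List.length_replicate]; omega)] at hc
        simp at hc
    · intro i j
      exact ⟨fun hc => absurd hc (fun h => h), fun _ => rfl⟩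
  obtain ⟨W', ⟨hdim', hvis', hWf', hWc', ho1', ho2', ho3'⟩, _, hall⟩ :=
    outer_fold hpre (cellsA g.length (ColsS g))
      (g, List.replicate g.length (List.replicate (ColsS g) false)) (fun _ => False)
      (fun p hp => mem_cellsA.1 hp) hinit
  refine ⟨ho1', fun i => ⟨ho2' i, fun j => ?_⟩⟩
  by_cases hfive : FiveS g (i, j)
  · have hW : W' (i, j) := hall (i, j) (mem_cellsA.2 ⟨hfive.1, hfive.2.1⟩) hfive
    rw [(ho3' i j).1 hW]
    have hsv : SpecVal g i j ((g.getD i []).getD j 0) =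
        (if CompCnt g (i, j) = 6 then 2 else 1) := by
      unfold SpecVal
      exact if_pos ⟨hfive.2.1, hfive.2.2⟩
    rw [hsv]
  · have hW : ¬ W' (i, j) := fun hc => hfive (hWf' _ hc)
    rw [(ho3' i j).2 hW]
    have hnot : ¬ (j < ColsS g ∧ (g.getD i []).getD j 0 = 5) := by
      rintro ⟨hj, hv⟩
      have hi : i < g.length := by
        by_contra h
        rw [List.getD_eq_default g [] (by omega)] at hv
        simp at hv
      exact hfive ⟨hi, hj, hv⟩
    have hsv : SpecVal g i j ((g.getD i []).getD j 0) = (g.getD i []).getD j 0 := by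
      unfold SpecVal
      exact if_neg hnot
    rw [hsv]

-- ---- two outputs describing the same grid are equal ----
lemma describes_ext {g o₁ o₂ : List (List Int)} (h₁ : Describes g o₁) (h₂ : Describes g o₂) :
    o₁ = o₂ := by
  apply List.ext_getElem (h₁.1.trans h₂.1.symm)
  intro i hi1 hi2
  have hr1 : o₁.getD i [] = o₁[i] := List.getD_eq_getElem _ _ hi1
  have hr2 : o₂.getD i [] = o₂[i] := List.getD_eq_getElem _ _ hi2
  have hlen : o₁[i].length = o₂[i].length := by
    rw [← hr1, ← hr2, (h₁.2 i).1, (h₂.2 i).1]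
  apply List.ext_getElem hlen
  intro j hj1 hj2
  have e1 : o₁[i][j] = (o₁.getD i []).getD j 0 := by
    rw [hr1, List.getD_eq_getElem _ _ hj1]
  have e2 : o₂[i][j] = (o₂.getD i []).getD j 0 := by
    rw [hr2, List.getD_eq_getElem _ _ hj2]
  rw [e1, e2, (h₁.2 i).2 j, (h₂.2 i).2 j]


-- ---- union-find core (B side) ----
def pbound (parent : List Nat) : Prop := ∀ a, parent.getD a a ≤ a

lemma findB_fuel {parent : List Nat} (hb : pbound parent) :
    ∀ a f1 f2, a < f1 → a < f2 → findB parent f1 a = findB parent f2 a := by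
  intro a
  induction a using Nat.strong_induction_on with
  | _ a ih =>
    intro f1 f2 h1 h2
    cases f1 with
    | zero => omega
    | succ f1 =>
      cases f2 with
      | zero => omega
      | succ f2 =>
        simp only [findB]
        by_cases hp : parent.getD a a = a
        · rw [if_pos hp, if_pos hp]
        · rw [if_neg hp, if_neg hp]
          have hlt : parent.getD a a < a := lt_of_le_of_ne (hb a) hp
          exact ih _ hlt _ _ (by omega) (by omega)

lemma rootB_rec {parent : List Nat} (hb : pbound parent) (a : Nat) :
    rootB parent a = if parent.getD a a = a then a else rootB parent (parent.getD a a) := by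
  by_cases hp : parent.getD a a = a
  · rw [if_pos hp]
    show (if parent.getD a a = a then a else findB parent a (parent.getD a a)) = a
    rw [if_pos hp]
  · rw [if_neg hp]
    show (if parent.getD a a = a then a else findB parent a (parent.getD a a)) =
      rootB parent (parent.getD a a)
    rw [if_neg hp]
    have hlt : parent.getD a a < a := lt_of_le_of_ne (hb a) hp
    exact findB_fuel hb _ _ _ (by omega) (by omega)

lemma rootB_le {parent : List Nat} (hb : pbound parent) (a : Nat) : rootB parent a ≤ a := by
  induction a using Nat.strong_induction_on with
  | _ a ih =>
    rw [rootB_rec hb a]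
    by_cases hp : parent.getD a a = a
    · rw [if_pos hp]
    · rw [if_neg hp]
      have hlt : parent.getD a a < a := lt_of_le_of_ne (hb a) hp
      exact le_trans (ih _ hlt) (by omega)

lemma rootB_fix {parent : List Nat} (hb : pbound parent) (a : Nat) :
    parent.getD (rootB parent a) (rootB parent a) = rootB parent a := by
  induction a using Nat.strong_induction_on with
  | _ a ih =>
    rw [rootB_rec hb a]
    by_cases hp : parent.getD a a = a
    · rw [if_pos hp]; exact hp
    · rw [if_neg hp]
      exact ih _ (lt_of_le_of_ne (hb a) hp)

lemma rootB_of_fix {parent : List Nat} (hb : pbound parent) {a : Nat}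
    (h : parent.getD a a = a) : rootB parent a = a := by
  rw [rootB_rec hb a, if_pos h]

lemma getD_set_uf {parent : List Nat} {rb ra : Nat} (hrb : rb < parent.length) (x : Nat) :
    (parent.set rb ra).getD x x = if x = rb then ra else parent.getD x x := by
  by_cases hx : x = rb
  · subst hx
    rw [if_pos rfl, getD_set_self _ _ _ _ hrb]
  · rw [if_neg hx, getD_set_ne _ _ _ (fun hc => hx hc.symm)]

lemma root_set {parent : List Nat} {ra rb : Nat} (hb : pbound parent)
    (hra : parent.getD ra ra = ra) (hrb : parent.getD rb rb = rb)
    (hlt : ra < rb) (hrbN : rb < parent.length) :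
    pbound (parent.set rb ra) ∧
    (∀ a, rootB (parent.set rb ra) a = if rootB parent a = rb then ra else rootB parent a) := by
  have hb' : pbound (parent.set rb ra) := by
    intro x
    rw [getD_set_uf hrbN x]
    by_cases hx : x = rb
    · rw [if_pos hx]; omega
    · rw [if_neg hx]; exact hb x
  refine ⟨hb', ?_⟩
  intro a
  induction a using Nat.strong_induction_on with
  | _ a ih =>
    rw [rootB_rec hb' a, getD_set_uf hrbN a]
    by_cases hab : a = rb
    · subst hab
      rw [if_pos rfl, if_neg (by omega), ih ra hlt, rootB_of_fix hb hra,
        if_neg (by omega), if_pos (rootB_of_fix hb hrb)]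
    · rw [if_neg hab]
      by_cases hp : parent.getD a a = a
      · rw [if_pos hp, rootB_of_fix hb hp, if_neg hab]
      · rw [if_neg hp]
        have hlt2 : parent.getD a a < a := lt_of_le_of_ne (hb a) hp
        rw [ih _ hlt2]
        have : rootB parent a = rootB parent (parent.getD a a) := by
          rw [rootB_rec hb a, if_neg hp]
        rw [this]

-- ---- reflexive-transitive closure utilities ----
lemma rt_symm_gen {α : Type} {r : α → α → Prop} (hs : ∀ x y, r x y → r y x) {a b : α}
    (h : Relation.ReflTransGen r a b) : Relation.ReflTransGen r b a := by
  induction h with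
  | refl => exact Relation.ReflTransGen.refl
  | tail _ hbc ih =>
    exact Relation.ReflTransGen.trans (Relation.ReflTransGen.single (hs _ _ hbc)) ih

lemma rt_congr {α : Type} {r s : α → α → Prop} (h : ∀ x y, r x y ↔ s x y) {a b : α} :
    Relation.ReflTransGen r a b ↔ Relation.ReflTransGen s a b :=
  ⟨Relation.ReflTransGen.mono (fun x y hxy => (h x y).1 hxy),
   Relation.ReflTransGen.mono (fun x y hxy => (h x y).2 hxy)⟩

lemma rt_join {α : Type} {r : α → α → Prop} (_hs : ∀ x y, r x y → r y x) (u v a b : α) :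
    Relation.ReflTransGen (fun x y => r x y ∨ (x = u ∧ y = v) ∨ (x = v ∧ y = u)) a b ↔
    (Relation.ReflTransGen r a b ∨
      (Relation.ReflTransGen r a u ∧ Relation.ReflTransGen r v b) ∨
      (Relation.ReflTransGen r a v ∧ Relation.ReflTransGen r u b)) := by
  constructor
  · intro h
    induction h with
    | refl => exact Or.inl Relation.ReflTransGen.refl
    | tail _ hbc ih =>
      rename_i m c _
      rcases hbc with hmc | ⟨rfl, rfl⟩ | ⟨rfl, rfl⟩
      · rcases ih with h1 | ⟨h1, h2⟩ | ⟨h1, h2⟩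
        · exact Or.inl (h1.tail hmc)
        · exact Or.inr (Or.inl ⟨h1, h2.tail hmc⟩)
        · exact Or.inr (Or.inr ⟨h1, h2.tail hmc⟩)
      · rcases ih with h1 | ⟨h1, h2⟩ | ⟨h1, h2⟩
        · exact Or.inr (Or.inl ⟨h1, Relation.ReflTransGen.refl⟩)
        · exact Or.inr (Or.inl ⟨h1, Relation.ReflTransGen.refl⟩)
        · exact Or.inl h1
      · rcases ih with h1 | ⟨h1, h2⟩ | ⟨h1, h2⟩
        · exact Or.inr (Or.inr ⟨h1, Relation.ReflTransGen.refl⟩)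
        · exact Or.inl h1
        · exact Or.inr (Or.inr ⟨h1, Relation.ReflTransGen.refl⟩)
  · have hmono : ∀ x y : α, Relation.ReflTransGen r x y →
        Relation.ReflTransGen (fun x y => r x y ∨ (x = u ∧ y = v) ∨ (x = v ∧ y = u)) x y :=
      fun x y h => h.mono (fun a b hab => Or.inl hab)
    have hedge : Relation.ReflTransGen
        (fun x y => r x y ∨ (x = u ∧ y = v) ∨ (x = v ∧ y = u)) u v :=
      Relation.ReflTransGen.single (Or.inr (Or.inl ⟨rfl, rfl⟩))
    have hedge' : Relation.ReflTransGen
        (fun x y => r x y ∨ (x = u ∧ y = v) ∨ (x = v ∧ y = u)) v u :=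
      Relation.ReflTransGen.single (Or.inr (Or.inr ⟨rfl, rfl⟩))
    rintro (h | ⟨h1, h2⟩ | ⟨h1, h2⟩)
    · exact hmono _ _ h
    · exact ((hmono _ _ h1).trans hedge).trans (hmono _ _ h2)
    · exact ((hmono _ _ h1).trans hedge').trans (hmono _ _ h2)

lemma rt_bot {α : Type} {a b : α} :
    Relation.ReflTransGen (fun _ _ => False) a b ↔ a = b := by
  constructor
  · intro h
    induction h with
    | refl => rfl
    | tail _ hbc _ => cases hbc
  · rintro rfl; exact Relation.ReflTransGen.refl


lemma union_one {parent : List Nat} {S : Nat → Nat → Prop} {u v N : Nat}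
    (hlen : parent.length = N) (hb : pbound parent) (hu : u < N) (hv : v < N)
    (hsym : ∀ a b, S a b → S b a)
    (hiff : ∀ a b, a < N → b < N →
      (rootB parent a = rootB parent b ↔ Relation.ReflTransGen S a b)) :
    (unionB parent u v).length = N ∧ pbound (unionB parent u v) ∧
    (∀ a b, a < N → b < N →
      (rootB (unionB parent u v) a = rootB (unionB parent u v) b ↔
        Relation.ReflTransGen (fun x y => S x y ∨ (x = u ∧ y = v) ∨ (x = v ∧ y = u)) a b)) := by
  have hdef : unionB parent u v =
      if rootB parent u < rootB parent v then parent.set (rootB parent v) (rootB parent u)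
      else if rootB parent v < rootB parent u then parent.set (rootB parent u) (rootB parent v)
      else parent := rfl
  have hfixu := rootB_fix hb u
  have hfixv := rootB_fix hb v
  have hraN : rootB parent u < N := lt_of_le_of_lt (rootB_le hb u) hu
  have hrbN : rootB parent v < N := lt_of_le_of_lt (rootB_le hb v) hv
  by_cases hab : rootB parent u < rootB parent v
  · rw [hdef, if_pos hab]
    obtain ⟨hb', hroot⟩ := root_set hb hfixu hfixv hab (by omega)
    refine ⟨by rw [List.length_set, hlen], hb', ?_⟩
    intro a b ha hbb
    rw [hroot a, hroot b, rt_join hsym]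
    have key : ∀ x y : Nat,
        ((if x = rootB parent v then rootB parent u else x) =
         (if y = rootB parent v then rootB parent u else y)) ↔
        (x = y ∨ (x = rootB parent u ∧ y = rootB parent v) ∨
          (x = rootB parent v ∧ y = rootB parent u)) := by
      intro x y
      split_ifs <;> omega
    rw [key]
    have e1 : (rootB parent a = rootB parent b) ↔ Relation.ReflTransGen S a b := hiff a b ha hbb
    have e2 : (rootB parent a = rootB parent u) ↔ Relation.ReflTransGen S a u := hiff a u ha hu
    have e3 : (rootB parent b = rootB parent v) ↔ Relation.ReflTransGen S b v := hiff b v hbb hv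
    have e4 : (rootB parent a = rootB parent v) ↔ Relation.ReflTransGen S a v := hiff a v ha hv
    have e5 : (rootB parent b = rootB parent u) ↔ Relation.ReflTransGen S b u := hiff b u hbb hu
    constructor
    · rintro (h | ⟨h1, h2⟩ | ⟨h1, h2⟩)
      · exact Or.inl (e1.1 h)
      · exact Or.inr (Or.inl ⟨e2.1 h1, rt_symm_gen hsym (e3.1 h2)⟩)
      · exact Or.inr (Or.inr ⟨e4.1 h1, rt_symm_gen hsym (e5.1 h2)⟩)
    · rintro (h | ⟨h1, h2⟩ | ⟨h1, h2⟩)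
      · exact Or.inl (e1.2 h)
      · exact Or.inr (Or.inl ⟨e2.2 h1, e3.2 (rt_symm_gen hsym h2)⟩)
      · exact Or.inr (Or.inr ⟨e4.2 h1, e5.2 (rt_symm_gen hsym h2)⟩)
  · by_cases hba : rootB parent v < rootB parent u
    · rw [hdef, if_neg hab, if_pos hba]
      obtain ⟨hb', hroot⟩ := root_set hb hfixv hfixu hba (by omega)
      refine ⟨by rw [List.length_set, hlen], hb', ?_⟩
      intro a b ha hbb
      rw [hroot a, hroot b, rt_join hsym]
      have key : ∀ x y : Nat,
          ((if x = rootB parent u then rootB parent v else x) =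
           (if y = rootB parent u then rootB parent v else y)) ↔
          (x = y ∨ (x = rootB parent v ∧ y = rootB parent u) ∨
            (x = rootB parent u ∧ y = rootB parent v)) := by
        intro x y
        split_ifs <;> omega
      rw [key]
      have e1 : (rootB parent a = rootB parent b) ↔ Relation.ReflTransGen S a b := hiff a b ha hbb
      have e2 : (rootB parent a = rootB parent u) ↔ Relation.ReflTransGen S a u := hiff a u ha hu
      have e3 : (rootB parent b = rootB parent v) ↔ Relation.ReflTransGen S b v := hiff b v hbb hv
      have e4 : (rootB parent a = rootB parent v) ↔ Relation.ReflTransGen S a v := hiff a v ha hv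
      have e5 : (rootB parent b = rootB parent u) ↔ Relation.ReflTransGen S b u := hiff b u hbb hu
      constructor
      · rintro (h | ⟨h1, h2⟩ | ⟨h1, h2⟩)
        · exact Or.inl (e1.1 h)
        · exact Or.inr (Or.inr ⟨e4.1 h1, rt_symm_gen hsym (e5.1 h2)⟩)
        · exact Or.inr (Or.inl ⟨e2.1 h1, rt_symm_gen hsym (e3.1 h2)⟩)
      · rintro (h | ⟨h1, h2⟩ | ⟨h1, h2⟩)
        · exact Or.inl (e1.2 h)
        · exact Or.inr (Or.inr ⟨e2.2 h1, e3.2 (rt_symm_gen hsym h2)⟩)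
        · exact Or.inr (Or.inl ⟨e4.2 h1, e5.2 (rt_symm_gen hsym h2)⟩)
    · rw [hdef, if_neg hab, if_neg hba]
      refine ⟨hlen, hb, ?_⟩
      intro a b ha hbb
      have huv : Relation.ReflTransGen S u v := (hiff u v hu hv).1 (by omega)
      rw [hiff a b ha hbb, rt_join hsym]
      constructor
      · exact fun h => Or.inl h
      · rintro (h | ⟨h1, h2⟩ | ⟨h1, h2⟩)
        · exact h
        · exact (h1.trans huv).trans h2
        · exact (h1.trans (rt_symm_gen hsym huv)).trans h2


-- ---- flattened index encoding ----
def encP (g : List (List Int)) (p : Nat × Nat) : Nat := p.1 * ColsS g + p.2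

lemma encP_lt {g : List (List Int)} {p : Nat × Nat}
    (h1 : p.1 < g.length) (h2 : p.2 < ColsS g) : encP g p < g.length * ColsS g := by
  unfold encP
  calc p.1 * ColsS g + p.2 < (p.1 + 1) * ColsS g := by rw [Nat.succ_mul]; omega
  _ ≤ g.length * ColsS g := Nat.mul_le_mul_right _ h1

lemma encP_inj {g : List (List Int)} {p q : Nat × Nat}
    (hp2 : p.2 < ColsS g) (hq2 : q.2 < ColsS g) (h : encP g p = encP g q) : p = q := by
  unfold encP at h
  have hc : 0 < ColsS g := Nat.pos_of_ne_zero (by omega)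
  have h1 : p.1 = q.1 := by
    have e1 : (p.1 * ColsS g + p.2) / ColsS g = p.1 := by
      rw [Nat.mul_comm, Nat.mul_add_div hc, Nat.div_eq_of_lt hp2]
      omega
    have e2 : (q.1 * ColsS g + q.2) / ColsS g = q.1 := by
      rw [Nat.mul_comm, Nat.mul_add_div hc, Nat.div_eq_of_lt hq2]
      omega
    rw [← e1, ← e2, h]
  have h2 : p.2 = q.2 := by
    rw [h1] at h
    omega
  cases p; cases q
  simp only at h1 h2
  rw [h1, h2]

-- ---- the right/down edges contributed by one scanned cell ----
def edgeAt (g : List (List Int)) (p : Nat × Nat) (a b : Nat) : Prop :=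
  cellB g p.1 p.2 = 5 ∧
  ((p.1 + 1 < g.length ∧ cellB g (p.1 + 1) p.2 = 5 ∧
      ((a = encP g p ∧ b = encP g (p.1 + 1, p.2)) ∨ (a = encP g (p.1 + 1, p.2) ∧ b = encP g p))) ∨
   (p.2 + 1 < ColsS g ∧ cellB g p.1 (p.2 + 1) = 5 ∧
      ((a = encP g p ∧ b = encP g (p.1, p.2 + 1)) ∨ (a = encP g (p.1, p.2 + 1) ∧ b = encP g p))))

def ERel (g : List (List Int)) (l : List (Nat × Nat)) (a b : Nat) : Prop :=
  ∃ p ∈ l, edgeAt g p a b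

lemma union_fold {g : List (List Int)} :
    ∀ (l : List (Nat × Nat)) (parent : List Nat) (S : Nat → Nat → Prop),
    parent.length = g.length * ColsS g → pbound parent →
    (∀ p ∈ l, p.1 < g.length ∧ p.2 < ColsS g) →
    (∀ a b, S a b → S b a) →
    (∀ a b, a < g.length * ColsS g → b < g.length * ColsS g →
      (rootB parent a = rootB parent b ↔ Relation.ReflTransGen S a b)) →
    (l.foldl (unionStepB g g.length (ColsS g)) parent).length = g.length * ColsS g ∧
    pbound (l.foldl (unionStepB g g.length (ColsS g)) parent) ∧
    (∀ a b, a < g.length * ColsS g → b < g.length * ColsS g →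
      (rootB (l.foldl (unionStepB g g.length (ColsS g)) parent) a =
       rootB (l.foldl (unionStepB g g.length (ColsS g)) parent) b ↔
        Relation.ReflTransGen (fun x y => S x y ∨ ERel g l x y) a b)) := by
  intro l
  induction l with
  | nil =>
    intro parent S hlen hb _ hsym hiff
    rw [List.foldl_nil]
    refine ⟨hlen, hb, ?_⟩
    intro a b ha hbb
    rw [hiff a b ha hbb]
    exact rt_congr (fun x y => by
      simp only [ERel, List.not_mem_nil]
      constructor
      · exact fun h => Or.inl h
      · rintro (h | ⟨p, hp, _⟩)
        · exact h
        · cases hp)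
  | cons p l ih =>
    intro parent S hlen hb hrange hsym hiff
    rw [List.foldl_cons]
    have hpr := hrange p List.mem_cons_self
    by_cases hcell : cellB g p.1 p.2 = 5
    · have hstep : unionStepB g g.length (ColsS g) parent p =
          (if p.2 + 1 < ColsS g ∧ cellB g p.1 (p.2 + 1) = 5 then
            unionB (if p.1 + 1 < g.length ∧ cellB g (p.1 + 1) p.2 = 5 then
                unionB parent (encP g p) (encP g (p.1 + 1, p.2)) else parent)
              (encP g p) (encP g (p.1, p.2 + 1))
          else (if p.1 + 1 < g.length ∧ cellB g (p.1 + 1) p.2 = 5 then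
                unionB parent (encP g p) (encP g (p.1 + 1, p.2)) else parent)) := by
        unfold unionStepB
        rw [if_pos hcell]
        rfl
      have huN : encP g p < g.length * ColsS g := encP_lt hpr.1 hpr.2
      -- first (down) union
      by_cases hdc : p.1 + 1 < g.length ∧ cellB g (p.1 + 1) p.2 = 5
      · have hvdN : encP g (p.1 + 1, p.2) < g.length * ColsS g := encP_lt hdc.1 hpr.2
        obtain ⟨hlen1, hb1, hiff1⟩ := union_one hlen hb huN hvdN hsym hiff
        set S1 : Nat → Nat → Prop := fun x y => S x y ∨
          (x = encP g p ∧ y = encP g (p.1 + 1, p.2)) ∨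
          (x = encP g (p.1 + 1, p.2) ∧ y = encP g p) with hS1
        have hsym1 : ∀ a b, S1 a b → S1 b a := by
          intro a b hab
          rcases hab with h | h | h
          · exact Or.inl (hsym _ _ h)
          · exact Or.inr (Or.inr ⟨h.2, h.1⟩)
          · exact Or.inr (Or.inl ⟨h.2, h.1⟩)
        by_cases hrc : p.2 + 1 < ColsS g ∧ cellB g p.1 (p.2 + 1) = 5
        · have hvrN : encP g (p.1, p.2 + 1) < g.length * ColsS g := encP_lt hpr.1 hrc.1
          obtain ⟨hlen2, hb2, hiff2⟩ := union_one hlen1 hb1 huN hvrN hsym1 hiff1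
          rw [hstep, if_pos hrc, if_pos hdc]
          obtain ⟨hl3, hb3, hiff3⟩ := ih _ _ hlen2 hb2
            (fun q hq => hrange q (List.mem_cons_of_mem _ hq)) (by
              intro a b hab
              rcases hab with h | h | h
              · exact Or.inl (hsym1 _ _ h)
              · exact Or.inr (Or.inr ⟨h.2, h.1⟩)
              · exact Or.inr (Or.inl ⟨h.2, h.1⟩)) hiff2
          refine ⟨hl3, hb3, ?_⟩
          intro a b ha hbb
          rw [hiff3 a b ha hbb]
          apply rt_congr
          intro x y
          simp only [ERel, List.mem_cons, hS1]
          constructor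
          · rintro (((h | h) | h) | ⟨q, hq, he⟩)
            · exact Or.inl h
            · exact Or.inr ⟨p, Or.inl rfl, hcell, Or.inl ⟨hdc.1, hdc.2, h⟩⟩
            · exact Or.inr ⟨p, Or.inl rfl, hcell, Or.inr ⟨hrc.1, hrc.2, h⟩⟩
            · exact Or.inr ⟨q, Or.inr hq, he⟩
          · rintro (h | ⟨q, rfl | hq, he⟩)
            · exact Or.inl (Or.inl (Or.inl h))
            · rcases he.2 with hd | hr
              · exact Or.inl (Or.inl (Or.inr hd.2.2))
              · exact Or.inl (Or.inr hr.2.2)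
            · exact Or.inr ⟨q, hq, he⟩
        · rw [hstep, if_neg hrc, if_pos hdc]
          obtain ⟨hl3, hb3, hiff3⟩ := ih _ _ hlen1 hb1
            (fun q hq => hrange q (List.mem_cons_of_mem _ hq)) hsym1 hiff1
          refine ⟨hl3, hb3, ?_⟩
          intro a b ha hbb
          rw [hiff3 a b ha hbb]
          apply rt_congr
          intro x y
          simp only [ERel, List.mem_cons, hS1]
          constructor
          · rintro ((h | h) | ⟨q, hq, he⟩)
            · exact Or.inl h
            · exact Or.inr ⟨p, Or.inl rfl, hcell, Or.inl ⟨hdc.1, hdc.2, h⟩⟩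
            · exact Or.inr ⟨q, Or.inr hq, he⟩
          · rintro (h | ⟨q, rfl | hq, he⟩)
            · exact Or.inl (Or.inl h)
            · rcases he.2 with hd | hr
              · exact Or.inl (Or.inr hd.2.2)
              · exact absurd hr.1 (fun hc => hrc ⟨hc, hr.2.1⟩)
            · exact Or.inr ⟨q, hq, he⟩
      · by_cases hrc : p.2 + 1 < ColsS g ∧ cellB g p.1 (p.2 + 1) = 5
        · have hvrN : encP g (p.1, p.2 + 1) < g.length * ColsS g := encP_lt hpr.1 hrc.1
          obtain ⟨hlen2, hb2, hiff2⟩ := union_one hlen hb huN hvrN hsym hiff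
          rw [hstep, if_pos hrc, if_neg hdc]
          obtain ⟨hl3, hb3, hiff3⟩ := ih _ _ hlen2 hb2
            (fun q hq => hrange q (List.mem_cons_of_mem _ hq)) (by
              intro a b hab
              rcases hab with h | h | h
              · exact Or.inl (hsym _ _ h)
              · exact Or.inr (Or.inr ⟨h.2, h.1⟩)
              · exact Or.inr (Or.inl ⟨h.2, h.1⟩)) hiff2
          refine ⟨hl3, hb3, ?_⟩
          intro a b ha hbb
          rw [hiff3 a b ha hbb]
          apply rt_congr
          intro x y
          simp only [ERel, List.mem_cons]
          constructor
          · rintro ((h | h) | ⟨q, hq, he⟩)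
            · exact Or.inl h
            · exact Or.inr ⟨p, Or.inl rfl, hcell, Or.inr ⟨hrc.1, hrc.2, h⟩⟩
            · exact Or.inr ⟨q, Or.inr hq, he⟩
          · rintro (h | ⟨q, rfl | hq, he⟩)
            · exact Or.inl (Or.inl h)
            · rcases he.2 with hd | hr
              · exact absurd hd.1 (fun hc => hdc ⟨hc, hd.2.1⟩)
              · exact Or.inl (Or.inr hr.2.2)
            · exact Or.inr ⟨q, hq, he⟩
        · rw [hstep, if_neg hrc, if_neg hdc]
          obtain ⟨hl3, hb3, hiff3⟩ := ih _ _ hlen hb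
            (fun q hq => hrange q (List.mem_cons_of_mem _ hq)) hsym hiff
          refine ⟨hl3, hb3, ?_⟩
          intro a b ha hbb
          rw [hiff3 a b ha hbb]
          apply rt_congr
          intro x y
          simp only [ERel, List.mem_cons]
          constructor
          · rintro (h | ⟨q, hq, he⟩)
            · exact Or.inl h
            · exact Or.inr ⟨q, Or.inr hq, he⟩
          · rintro (h | ⟨q, rfl | hq, he⟩)
            · exact Or.inl h
            · rcases he.2 with hd | hr
              · exact absurd hd.1 (fun hc => hdc ⟨hc, hd.2.1⟩)
              · exact absurd hr.1 (fun hc => hrc ⟨hc, hr.2.1⟩)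
            · exact Or.inr ⟨q, hq, he⟩
    · have hstep : unionStepB g g.length (ColsS g) parent p = parent := by
        unfold unionStepB
        rw [if_neg hcell]
      rw [hstep]
      obtain ⟨hl3, hb3, hiff3⟩ := ih _ _ hlen hb
        (fun q hq => hrange q (List.mem_cons_of_mem _ hq)) hsym hiff
      refine ⟨hl3, hb3, ?_⟩
      intro a b ha hbb
      rw [hiff3 a b ha hbb]
      apply rt_congr
      intro x y
      simp only [ERel, List.mem_cons]
      constructor
      · rintro (h | ⟨q, hq, he⟩)
        · exact Or.inl h
        · exact Or.inr ⟨q, Or.inr hq, he⟩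
      · rintro (h | ⟨q, rfl | hq, he⟩)
        · exact Or.inl h
        · exact absurd he.1 hcell
        · exact Or.inr ⟨q, hq, he⟩


lemma cellB_eq_cellA {g : List (List Int)} {i j : Nat} : cellB g i j = cellA g i j := rfl

lemma cellsB_eq_cellsA {r c : Nat} : cellsB r c = cellsA r c := rfl

lemma erel_iff_adj {g : List (List Int)} {a b : Nat} :
    ERel g (cellsB g.length (ColsS g)) a b ↔
    ∃ p q : Nat × Nat, AdjS g p q ∧ a = encP g p ∧ b = encP g q := by
  constructor
  · rintro ⟨m, hm, h5, hd | hr⟩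
    · have hmr := mem_cellsA.1 (cellsB_eq_cellsA ▸ hm)
      have hfm : FiveS g m := ⟨hmr.1, hmr.2, cellB_eq_cellA ▸ h5⟩
      have hfm' : FiveS g (m.1 + 1, m.2) := ⟨hd.1, hmr.2, cellB_eq_cellA ▸ hd.2.1⟩
      have hadj : AdjS g m (m.1 + 1, m.2) := ⟨hfm, hfm', Or.inr ⟨rfl, Or.inl rfl⟩⟩
      rcases hd.2.2 with ⟨rfl, rfl⟩ | ⟨rfl, rfl⟩
      · exact ⟨m, (m.1 + 1, m.2), hadj, rfl, rfl⟩
      · exact ⟨(m.1 + 1, m.2), m, adjS_symm hadj, rfl, rfl⟩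
    · have hmr := mem_cellsA.1 (cellsB_eq_cellsA ▸ hm)
      have hfm : FiveS g m := ⟨hmr.1, hmr.2, cellB_eq_cellA ▸ h5⟩
      have hfm' : FiveS g (m.1, m.2 + 1) := ⟨hmr.1, hr.1, cellB_eq_cellA ▸ hr.2.1⟩
      have hadj : AdjS g m (m.1, m.2 + 1) := ⟨hfm, hfm', Or.inl ⟨rfl, Or.inl rfl⟩⟩
      rcases hr.2.2 with ⟨rfl, rfl⟩ | ⟨rfl, rfl⟩
      · exact ⟨m, (m.1, m.2 + 1), hadj, rfl, rfl⟩
      · exact ⟨(m.1, m.2 + 1), m, adjS_symm hadj, rfl, rfl⟩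
  · rintro ⟨p, q, ⟨hfp, hfq, hrel⟩, rfl, rfl⟩
    obtain ⟨pa, pb⟩ := p
    obtain ⟨qa, qb⟩ := q
    obtain ⟨hp1, hp2, hp5⟩ := hfp
    obtain ⟨hq1, hq2, hq5⟩ := hfq
    simp only at hp1 hp2 hp5 hq1 hq2 hq5
    rcases hrel with ⟨he, hj | hj⟩ | ⟨he, hi | hi⟩
    · simp only at he hj
      subst he; subst hj
      exact ⟨(pa, pb), mem_cellsA.2 ⟨hp1, hp2⟩, hp5,
        Or.inr ⟨hq2, hq5, Or.inl ⟨rfl, rfl⟩⟩⟩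
    · simp only at he hj
      subst he; subst hj
      exact ⟨(pa, qb), mem_cellsA.2 ⟨hq1, hq2⟩, hq5,
        Or.inr ⟨hp2, hp5, Or.inr ⟨rfl, rfl⟩⟩⟩
    · simp only at he hi
      subst he; subst hi
      exact ⟨(pa, pb), mem_cellsA.2 ⟨hp1, hp2⟩, hp5,
        Or.inl ⟨hq1, hq5, Or.inl ⟨rfl, rfl⟩⟩⟩
    · simp only at he hi
      subst he; subst hi
      exact ⟨(qa, pb), mem_cellsA.2 ⟨hq1, hq2⟩, hq5,
        Or.inl ⟨hp1, hp5, Or.inr ⟨rfl, rfl⟩⟩⟩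

lemma rtE_iff_conn {g : List (List Int)} {p q : Nat × Nat}
    (hp : p.1 < g.length ∧ p.2 < ColsS g) (hq : q.1 < g.length ∧ q.2 < ColsS g) :
    Relation.ReflTransGen (fun x y => False ∨ ERel g (cellsB g.length (ColsS g)) x y)
      (encP g p) (encP g q) ↔ ConnS g p q := by
  constructor
  · intro h
    have main : ∀ a b, Relation.ReflTransGen
        (fun x y => False ∨ ERel g (cellsB g.length (ColsS g)) x y) a b →
        ∀ p' q' : Nat × Nat, a = encP g p' → b = encP g q' →
        p'.2 < ColsS g → q'.2 < ColsS g → ConnS g p' q' := by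
      intro a b hab
      induction hab with
      | refl =>
        intro p' q' h1 h2 hp' hq'
        have : p' = q' := encP_inj hp' hq' (by rw [← h1, ← h2])
        exact this ▸ Relation.ReflTransGen.refl
      | tail hab hbc ih =>
        intro p' q' h1 h2 hp' hq'
        rcases hbc with hf | he
        · cases hf
        · obtain ⟨m, m', hadj, rfl, rfl⟩ := erel_iff_adj.1 he
          have hcm : ConnS g p' m := ih p' m h1 rfl hp' hadj.1.2.1
          have hmq : m' = q' := encP_inj hadj.2.1.2.1 hq' h2
          exact hmq ▸ hcm.tail hadj
    exact main _ _ h p q rfl rfl hp.2 hq.2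
  · intro h
    clear hq
    induction h with
    | refl => exact Relation.ReflTransGen.refl
    | tail hab hbc ih =>
      exact ih.tail (Or.inr (erel_iff_adj.2 ⟨_, _, hbc, rfl, rfl⟩))

-- ---- the size-tally loop ----
lemma size_fold {g : List (List Int)} {parent : List Nat} (hb : pbound parent) :
    ∀ (l : List (Nat × Nat)) (s : List Nat), s.length = g.length * ColsS g →
    (∀ p ∈ l, p.1 < g.length ∧ p.2 < ColsS g) →
    (l.foldl (fun s (p : Nat × Nat) => if cellB g p.1 p.2 = 5 then
      s.set (rootB parent (encP g p)) (s.getD (rootB parent (encP g p)) 0 + 1) else s) s).length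
        = g.length * ColsS g ∧
    ∀ r, (l.foldl (fun s (p : Nat × Nat) => if cellB g p.1 p.2 = 5 then
      s.set (rootB parent (encP g p)) (s.getD (rootB parent (encP g p)) 0 + 1) else s) s).getD r 0
      = s.getD r 0 + l.countP (fun p => decide (cellB g p.1 p.2 = 5) &&
          (rootB parent (encP g p) == r)) := by
  intro l
  induction l with
  | nil => intro s hs _; exact ⟨hs, fun r => by simp⟩
  | cons p l ih =>
    intro s hs hrange
    have hpr := hrange p List.mem_cons_self
    rw [List.foldl_cons]
    by_cases hcell : cellB g p.1 p.2 = 5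
    · rw [if_pos hcell]
      have hrootN : rootB parent (encP g p) < s.length := by
        rw [hs]
        exact lt_of_le_of_lt (rootB_le hb _) (encP_lt hpr.1 hpr.2)
      obtain ⟨ih1, ih2⟩ := ih (s.set (rootB parent (encP g p))
          (s.getD (rootB parent (encP g p)) 0 + 1))
        (by rw [List.length_set, hs]) (fun q hq => hrange q (List.mem_cons_of_mem _ hq))
      refine ⟨ih1, fun r => ?_⟩
      rw [ih2 r, List.countP_cons]
      by_cases hr : rootB parent (encP g p) = r
      · rw [← hr, getD_set_self _ _ _ _ hrootN]
        simp [hcell, hr]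
        omega
      · rw [getD_set_ne _ _ _ hr]
        simp [hcell, hr]
    · rw [if_neg hcell]
      obtain ⟨ih1, ih2⟩ := ih s hs (fun q hq => hrange q (List.mem_cons_of_mem _ hq))
      refine ⟨ih1, fun r => ?_⟩
      rw [ih2 r, List.countP_cons]
      simp [hcell]

-- ---- the recolouring loop of B ----
lemma osetB_eq_osetA {o : List (List Int)} {i j : Nat} {c : Int} :
    osetB o i j c = osetA o i j c := rfl

lemma outB_fold {g : List (List Int)} (c : Nat × Nat → Int) :
    ∀ (l : List (Nat × Nat)) (o : List (List Int)),
    (∀ q ∈ l, q.1 < g.length ∧ q.2 < (g.getD q.1 []).length) →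
    o.length = g.length → (∀ i, (o.getD i []).length = (g.getD i []).length) →
    (l.foldl (fun o (p : Nat × Nat) =>
      if cellB g p.1 p.2 = 5 then osetB o p.1 p.2 (c p) else o) o).length = g.length ∧
    (∀ i, ((l.foldl (fun o (p : Nat × Nat) =>
      if cellB g p.1 p.2 = 5 then osetB o p.1 p.2 (c p) else o) o).getD i []).length =
        (g.getD i []).length) ∧
    (∀ i j, ((l.foldl (fun o (p : Nat × Nat) =>
      if cellB g p.1 p.2 = 5 then osetB o p.1 p.2 (c p) else o) o).getD i []).getD j 0 =
      if (i, j) ∈ l ∧ cellB g i j = 5 then c (i, j) else (o.getD i []).getD j 0) := by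
  intro l
  induction l with
  | nil =>
    intro o h1 h2 h3
    exact ⟨h2, h3, fun i j => by simp⟩
  | cons p l ih =>
    intro o hrange h1 h2
    have hpr := hrange p List.mem_cons_self
    rw [List.foldl_cons]
    by_cases hcell : cellB g p.1 p.2 = 5
    · rw [if_pos hcell]
      obtain ⟨g1, g2, g3⟩ := ih (osetB o p.1 p.2 (c p))
        (fun q hq => hrange q (List.mem_cons_of_mem _ hq))
        (by rw [osetB_eq_osetA, length_osetA, h1])
        (fun i => by rw [osetB_eq_osetA, rowlen_osetA, h2])
      refine ⟨g1, g2, fun i j => ?_⟩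
      rw [g3 i j]
      by_cases hmem : (i, j) ∈ l ∧ cellB g i j = 5
      · rw [if_pos hmem, if_pos ⟨List.mem_cons_of_mem _ hmem.1, hmem.2⟩]
      · rw [if_neg hmem]
        by_cases hd : (i, j) = p
        · cases hd
          rw [osetB_eq_osetA, if_pos ⟨List.mem_cons_self, hcell⟩]
          exact oget_osetA_self (by rw [h1]; exact hpr.1) (by rw [h2]; exact hpr.2)
        · rw [osetB_eq_osetA, oget_osetA_ne hd, if_neg (by
            rintro ⟨hm, hc5⟩
            rcases List.mem_cons.1 hm with hm | hm
            · exact hd hm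
            · exact hmem ⟨hm, hc5⟩)]
    · rw [if_neg hcell]
      obtain ⟨g1, g2, g3⟩ := ih o (fun q hq => hrange q (List.mem_cons_of_mem _ hq)) h1 h2
      refine ⟨g1, g2, fun i j => ?_⟩
      rw [g3 i j]
      by_cases hmem : (i, j) ∈ l ∧ cellB g i j = 5
      · rw [if_pos hmem, if_pos ⟨List.mem_cons_of_mem _ hmem.1, hmem.2⟩]
      · rw [if_neg hmem, if_neg (by
          rintro ⟨hm, hc5⟩
          rcases List.mem_cons.1 hm with hm | hm
          · exact hcell (hm ▸ hc5)
          · exact hmem ⟨hm, hc5⟩)]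


-- ---- the full B port satisfies Describes ----
def parentF (g : List (List Int)) : List Nat :=
  (cellsB g.length (ColsS g)).foldl (unionStepB g g.length (ColsS g))
    (List.range (g.length * ColsS g))

def sizeF (g : List (List Int)) : List Nat :=
  (cellsB g.length (ColsS g)).foldl (fun s (p : Nat × Nat) =>
    if cellB g p.1 p.2 = 5 then
      s.set (rootB (parentF g) (encP g p)) (s.getD (rootB (parentF g) (encP g p)) 0 + 1)
    else s) (List.replicate (g.length * ColsS g) 0)

def colorF (g : List (List Int)) (p : Nat × Nat) : Int :=
  if (sizeF g).getD (rootB (parentF g) (encP g p)) 0 = 6 then 2 else 1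

lemma pvGuardFalse {g : List (List Int)} (hne : g ≠ []) (hce : ColsS g ≠ 0) :
    (g.isEmpty || (g.headD []).isEmpty) = false := by
  cases g with
  | nil => exact absurd rfl hne
  | cons r t =>
    simp only [List.isEmpty_cons, Bool.false_or, List.headD_cons]
    cases r with
    | nil => simp [ColsS] at hce
    | cons a s => rfl

lemma transform_alt_describes {g : List (List Int)}
    (hpre : ∀ row ∈ g, ColsS g ≤ row.length)
    (hne : g ≠ []) (hce : ColsS g ≠ 0) :
    Describes g (transform_alt g) := by
  have hguard := pvGuardFalse hne hce
  have halt : transform_alt g = (cellsB g.length (ColsS g)).foldl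
      (fun o (p : Nat × Nat) =>
        if cellB g p.1 p.2 = 5 then osetB o p.1 p.2 (colorF g p) else o) g := by
    unfold transform_alt
    rw [if_neg (by rw [hguard]; exact Bool.false_ne_true)]
    rfl
  rw [halt]
  have hranges : ∀ p ∈ cellsB g.length (ColsS g), p.1 < g.length ∧ p.2 < ColsS g :=
    fun p hp => mem_cellsA.1 hp
  -- 1. the union-find invariant
  have hga : ∀ a, (List.range (g.length * ColsS g)).getD a a = a := by
    intro a
    by_cases ha : a < g.length * ColsS g
    · rw [List.getD_eq_getElem _ _ (by simpa using ha)]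
      simp
    · rw [List.getD_eq_default _ _ (by simpa using ha)]
  have hbase_pb : pbound (List.range (g.length * ColsS g)) := fun a => le_of_eq (hga a)
  obtain ⟨hlenF, hbF, hiffF⟩ := union_fold (cellsB g.length (ColsS g))
    (List.range (g.length * ColsS g)) (fun _ _ => False) (by simp) hbase_pb hranges
    (fun a b h => h.elim)
    (by
      intro a b _ _
      rw [rootB_of_fix hbase_pb (hga a), rootB_of_fix hbase_pb (hga b), rt_bot])
  rw [show (cellsB g.length (ColsS g)).foldl (unionStepB g g.length (ColsS g))
      (List.range (g.length * ColsS g)) = parentF g from rfl] at hlenF hbF hiffF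
  -- 2. the size tally
  obtain ⟨hsl, hsv⟩ := size_fold hbF (cellsB g.length (ColsS g))
    (List.replicate (g.length * ColsS g) 0) (by simp) hranges
  rw [show ((cellsB g.length (ColsS g)).foldl (fun s (p : Nat × Nat) =>
      if cellB g p.1 p.2 = 5 then
        s.set (rootB (parentF g) (encP g p)) (s.getD (rootB (parentF g) (encP g p)) 0 + 1)
      else s) (List.replicate (g.length * ColsS g) 0)) = sizeF g from rfl] at hsv
  have hkey : ∀ p : Nat × Nat, FiveS g p →
      (sizeF g).getD (rootB (parentF g) (encP g p)) 0 = CompCnt g p := by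
    intro p hfp
    rw [hsv]
    have hrepl : (List.replicate (g.length * ColsS g) (0 : Nat)).getD
        (rootB (parentF g) (encP g p)) 0 = 0 := by
      by_cases h : rootB (parentF g) (encP g p) < g.length * ColsS g
      · rw [List.getD_replicate _ h]
      · rw [List.getD_eq_default _ _ (by simpa using h)]
    rw [hrepl, Nat.zero_add]
    unfold CompCnt
    apply List.countP_congr
    intro x hx
    have hxr := mem_cellsA.1 hx
    by_cases hconn : ConnS g p x
    · have hfx := connS_five hconn hfp
      have hroot : rootB (parentF g) (encP g x) = rootB (parentF g) (encP g p) :=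
        (hiffF (encP g x) (encP g p) (encP_lt hxr.1 hxr.2) (encP_lt hfp.1 hfp.2.1)).2
          ((rtE_iff_conn ⟨hxr.1, hxr.2⟩ ⟨hfp.1, hfp.2.1⟩).2 (connS_symm hconn))
      have h1 : (decide (cellB g x.1 x.2 = 5) &&
          (rootB (parentF g) (encP g x) == rootB (parentF g) (encP g p))) = true := by
        rw [hroot]
        simp [show cellB g x.1 x.2 = 5 from hfx.2.2]
      rw [h1, @decide_eq_true _ (Classical.propDecidable _) hconn]
    · have h2 : @decide (ConnS g p x) (Classical.propDecidable _) = false :=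
        @decide_eq_false _ (Classical.propDecidable _) hconn
      rw [h2]
      by_cases hcx : cellB g x.1 x.2 = 5
      · have hner : rootB (parentF g) (encP g x) ≠ rootB (parentF g) (encP g p) := by
          intro h
          have hrt := (hiffF (encP g x) (encP g p)
            (encP_lt hxr.1 hxr.2) (encP_lt hfp.1 hfp.2.1)).1 h
          exact hconn (connS_symm ((rtE_iff_conn ⟨hxr.1, hxr.2⟩ ⟨hfp.1, hfp.2.1⟩).1 hrt))
        simp [hcx, hner]
      · simp [hcx]
  -- 3. the recolouring loop
  obtain ⟨o1, o2, o3⟩ := outB_fold (colorF g) (cellsB g.length (ColsS g)) g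
    (by
      intro q hq
      have hqr := mem_cellsA.1 hq
      exact ⟨hqr.1, lt_of_lt_of_le hqr.2 (hpre _ (by
        rw [List.getD_eq_getElem _ _ (by exact hqr.1)]
        exact List.getElem_mem _))⟩)
    rfl (fun _ => rfl)
  refine ⟨o1, fun i => ⟨o2 i, fun j => ?_⟩⟩
  rw [o3 i j]
  by_cases hfive : FiveS g (i, j)
  · rw [if_pos ⟨mem_cellsA.2 ⟨hfive.1, hfive.2.1⟩, hfive.2.2⟩]
    have hsv2 : SpecVal g i j ((g.getD i []).getD j 0) =
        (if CompCnt g (i, j) = 6 then 2 else 1) := by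
      unfold SpecVal
      exact if_pos ⟨hfive.2.1, hfive.2.2⟩
    rw [hsv2]
    unfold colorF
    rw [hkey (i, j) hfive]
  · rw [if_neg (by
      rintro ⟨hm, hc5⟩
      have hmr := mem_cellsA.1 hm
      exact hfive ⟨hmr.1, hmr.2, hc5⟩)]
    have hnot : ¬ (j < ColsS g ∧ (g.getD i []).getD j 0 = 5) := by
      rintro ⟨hj, hv⟩
      have hi : i < g.length := by
        by_contra h
        rw [List.getD_eq_default g [] (by omega)] at hv
        simp at hv
      exact hfive ⟨hi, hj, hv⟩
    have hsv2 : SpecVal g i j ((g.getD i []).getD j 0) = (g.getD i []).getD j 0 := by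
      unfold SpecVal
      exact if_neg hnot
    rw [hsv2]

-- ===== VERDICT (by name: the statement is the Claim_ definition above) =====
theorem transform_spec : Claim_equal_transform := by
  unfold Claim_equal_transform Spec_transform
  intro g _ hpre
  by_cases hguard : (g.isEmpty || (g.headD []).isEmpty) = true
  · unfold transform transform_alt
    rw [if_pos hguard, if_pos hguard]
  · have hne : g ≠ [] := by
      intro h
      subst h
      simp at hguard
    have hce : ColsS g ≠ 0 := by
      intro h
      apply hguard
      cases g with
      | nil => rfl
      | cons r t =>
        simp only [ColsS, List.headD_cons] at h
        simp [List.length_eq_zero_iff.1 h]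
    have hpre' : ∀ row ∈ g, ColsS g ≤ row.length := by
      rcases hpre with h | h
      · exact absurd (by rw [ColsS, h]; rfl) hce
      · exact h
    exact describes_ext (transform_describes hpre' hne hce)
      (transform_alt_describes hpre' hne hce)
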